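-- pv_equiv track=rewrite | github.com/kaestro/algorithms_v3 | Daily Practices/February/Week 5th/석유 시추 - programmers.py | solution
-- ===== SOURCE A (Python) =====
-- from typing import List
--
-- def bfs(land: List[List[int]], area_id_matrix: List[List[int]], start_row: int, start_col: int, id: int) -> int:
--     directions = [(0, 1), (0, -1), (1, 0), (-1, 0)]
--     queue = [(start_row, start_col)]
--     area_id_matrix[start_row][start_col] = id
--     area = 1
--
--     while queue:
--         current_row, current_col = queue.pop(0)
--         for direction_row, direction_col in directions:
--             next_row, next_col = current_row + direction_row, current_col + direction_col
--             if 0 <= next_row < len(land) and 0 <= next_col < len(land[0]) and area_id_matrix[next_row][next_col] == 0 and land[next_row][next_col] == 1: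
--                 queue.append((next_row, next_col))
--                 area_id_matrix[next_row][next_col] = id
--                 area += 1
--     return area
--
-- def solution(land: List[List[int]]) -> int:
--     answer = 0
--     id = 1
--     area_dict = {}
--
--     area_id_matrix = [[0 for _ in range(len(land[0]))] for _ in range(len(land))]
--
--     for row in range(len(land)):
--         for col in range(len(land[0])):
--             if land[row][col] == 1 and area_id_matrix[row][col] == 0:
--                 area = bfs(land, area_id_matrix, row, col, id)
--                 area_dict[id] = area
--                 id += 1
--
--     for col in range(len(land[0])):
--         column_sum = 0
--         visited_id = set()
--         for row in range(len(land)):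
--             if area_id_matrix[row][col] != 0 and area_id_matrix[row][col] not in visited_id:
--                 column_sum += area_dict[area_id_matrix[row][col]]
--                 visited_id.add(area_id_matrix[row][col])
--         answer = max(answer, column_sum)
--     return answer
-- ===== SOURCE B (Python) =====
-- def solution(land):
--     rows, cols = len(land), len(land[0])
--     n = rows * cols
--     parent = list(range(n))
--
--     def find(i):
--         while parent[i] != i:
--             i = parent[i]
--         return i
--
--     # union every 1-cell with its right and down 1-neighbours (attach larger root under smaller)
--     for r in range(rows):
--         for c in range(cols):
--             if land[r][c] == 1:
--                 for nr, nc in ((r, c + 1), (r + 1, c)):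
--                     if nr < rows and nc < cols and land[nr][nc] == 1:
--                         ra, rb = find(r * cols + c), find(nr * cols + nc)
--                         if ra != rb:
--                             if ra < rb:
--                                 parent[rb] = ra
--                             else:
--                                 parent[ra] = rb
--
--     size = {}
--     for r in range(rows):
--         for c in range(cols):
--             if land[r][c] == 1:
--                 root = find(r * cols + c)
--                 size[root] = size.get(root, 0) + 1
--
--     best = 0
--     for c in range(cols):
--         roots = {find(r * cols + c) for r in range(rows) if land[r][c] == 1}
--         best = max(best, sum(size[x] for x in roots))
--     return best
-- ===== Notes on version B (the rewrite author's own statement) =====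
-- stated objective: alternative
-- what changed: Replaces BFS flood-fill labelling plus an id->area dict by a union-find (disjoint-set forest) over the R*C cell indices: one pass unions each 1-cell with its right and down 1-neighbours, a second pass counts component sizes keyed by root, and each column's score is the sum of sizes over the distinct roots of its 1-cells.
import Mathlib
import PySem

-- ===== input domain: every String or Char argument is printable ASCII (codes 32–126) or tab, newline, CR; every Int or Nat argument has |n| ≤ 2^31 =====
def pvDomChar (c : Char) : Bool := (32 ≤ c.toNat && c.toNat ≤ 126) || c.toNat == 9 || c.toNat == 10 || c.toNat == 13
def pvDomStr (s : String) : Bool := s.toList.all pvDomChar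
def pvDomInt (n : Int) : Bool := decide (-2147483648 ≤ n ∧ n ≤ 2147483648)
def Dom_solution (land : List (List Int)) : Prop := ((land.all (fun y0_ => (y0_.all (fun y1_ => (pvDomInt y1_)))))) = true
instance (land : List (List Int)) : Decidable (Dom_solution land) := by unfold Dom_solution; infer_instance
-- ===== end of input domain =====

-- B replaces A's BFS flood-fill labelling (ids + id→area dict) by a union-find forest over
-- the R*C cell indices: one pass unions each 1-cell with its right/down 1-neighbours, a
-- counting pass sizes each root, and each column sums the sizes of its distinct roots.
-- Equivalence is about the return value (A mutates only a matrix local to it).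

-- shared matrix-indexing helper (both Pythons read matrix[r][c] only at guarded in-range indices)
def lgetI (m : List (List Int)) (r c : Int) : Int := (m.getD r.toNat []).getD c.toNat 0
def msetI (m : List (List Int)) (r c : Int) (v : Int) : List (List Int) :=
  m.set r.toNat ((m.getD r.toNat []).set c.toNat v)

-- ===== PORT A =====
def bfsStep (land : List (List Int)) (id cr cc : Int)
    (st : List (List Int) × List (Int × Int) × Int) (d : Int × Int) :
    List (List Int) × List (Int × Int) × Int :=
  let nr := cr + d.1
  let nc := cc + d.2
  if 0 ≤ nr ∧ nr < (land.length : Int) ∧ 0 ≤ nc ∧ nc < ((land.headI).length : Int)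
      ∧ lgetI st.1 nr nc = 0 ∧ lgetI land nr nc = 1 then
    (msetI st.1 nr nc id, st.2.1 ++ [(nr, nc)], st.2.2 + 1)
  else st

def bfsLoop (land : List (List Int)) (id : Int) :
    Nat → List (List Int) → List (Int × Int) → Int → List (List Int) × Int
  | 0, m, _, area => (m, area)
  | fuel+1, m, queue, area =>
    match queue with
    | [] => (m, area)
    | c :: rest =>
      let st := [((0 : Int), (1 : Int)), (0, -1), (1, 0), (-1, 0)].foldl
        (bfsStep land id c.1 c.2) (m, rest, area)
      bfsLoop land id fuel st.1 st.2.1 st.2.2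

def bfs (land m : List (List Int)) (sr sc id : Int) : List (List Int) × Int :=
  bfsLoop land id (2 * land.length * (land.headI).length + 2) (msetI m sr sc id) [(sr, sc)] 1

def solution (land : List (List Int)) : Int :=
  let st := (List.range land.length).foldl (fun st (row : Nat) =>
    (List.range (land.headI).length).foldl (fun st (col : Nat) =>
      if lgetI land row col = 1 ∧ lgetI st.1 row col = 0 then
        let res := bfs land st.1 row col st.2.2
        (res.1, st.2.1.insert st.2.2 res.2, st.2.2 + 1)
      else st) st)
    (land.map (fun _ => List.replicate (land.headI).length (0 : Int)),
     (PySem.Dict.empty : PySem.Dict Int Int), (1 : Int))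
  (List.range (land.headI).length).foldl (fun answer (col : Nat) =>
    let p := (List.range land.length).foldl (fun (p : Int × PySem.Set Int) (row : Nat) =>
      let v := lgetI st.1 row col
      if v ≠ 0 ∧ ¬ (PySem.Set.contains p.2 v = true) then
        (p.1 + PySem.Dict.getD st.2.1 v 0, PySem.Set.add p.2 v)
      else p) ((0 : Int), (PySem.Set.empty : PySem.Set Int))
    max answer p.1) 0

-- ===== PORT B =====
-- find: follow parent pointers to the root (the while loop; parent[i] ≤ i always, so
-- parent.length is enough fuel for the chain to reach its root)
def ufFind (parent : List Nat) : Nat → Nat → Nat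
  | 0, i => i
  | fuel+1, i => if parent.getD i 0 ≠ i then ufFind parent fuel (parent.getD i 0) else i

def unionNbr (land : List (List Int)) (rows cols r c : Nat) (parent : List Nat)
    (n : Nat × Nat) : List Nat :=
  if n.1 < rows ∧ n.2 < cols ∧ lgetI land n.1 n.2 = 1 then
    let ra := ufFind parent parent.length (r * cols + c)
    let rb := ufFind parent parent.length (n.1 * cols + n.2)
    if ra ≠ rb then (if ra < rb then parent.set rb ra else parent.set ra rb) else parent
  else parent

def solution_alt (land : List (List Int)) : Int :=
  let rows := land.length
  let cols := (land.headI).length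
  let parent := (List.range rows).foldl (fun parent (r : Nat) =>
    (List.range cols).foldl (fun parent (c : Nat) =>
      if lgetI land r c = 1 then
        [(r, c + 1), (r + 1, c)].foldl (unionNbr land rows cols r c) parent
      else parent) parent) (List.range (rows * cols))
  let size := (List.range rows).foldl (fun d (r : Nat) =>
    (List.range cols).foldl (fun (d : PySem.Dict Nat Int) (c : Nat) =>
      if lgetI land r c = 1 then
        let root := ufFind parent parent.length (r * cols + c)
        d.insert root (d.getD root 0 + 1)
      else d) d) PySem.Dict.empty
  (List.range cols).foldl (fun best (c : Nat) =>
    let roots : PySem.Set Nat := PySem.Set.ofList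
      (((List.range rows).filter (fun (r : Nat) => lgetI land r c = 1)).map
        (fun (r : Nat) => ufFind parent parent.length (r * cols + c)))
    max best (roots.foldl (fun s x => s + size.getD x 0) 0)) 0

-- ===== PRECONDITION & SPEC =====
-- Pre_ excludes exactly the inputs on which the Python A raises IndexError (empty land, via
-- len(land[0]), and rows shorter than row 0, via land[row][col]); B raises there as well.
def Pre_solution (land : List (List Int)) : Prop :=
  land ≠ [] ∧ ∀ row ∈ land, (land.headI).length ≤ row.length
instance (land : List (List Int)) : Decidable (Pre_solution land) := by
  unfold Pre_solution; infer_instance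
def pvWitness_solution : List (List Int) := [[1, 0], [1, 1]]

def Spec_solution (land : List (List Int)) (out : Int) : Prop := out = solution_alt land
instance (land : List (List Int)) (out : Int) : Decidable (Spec_solution land out) := by
  unfold Spec_solution; infer_instance

-- ===== CLAIM (what is proved, stated in full; the proofs are below) =====
def Claim_equal_solution : Prop :=
  ∀ (land : List (List Int)), Dom_solution land → Pre_solution land →
    Spec_solution land (solution land)

-- ===== LEMMAS AND PROOFS =====

-- ---- geometry and reachability ----
def InGrid (land : List (List Int)) (p : Int × Int) : Prop :=
  0 ≤ p.1 ∧ p.1 < (land.length : Int) ∧ 0 ≤ p.2 ∧ p.2 < ((land.headI).length : Int)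

def FreeC (land m0 : List (List Int)) (p : Int × Int) : Prop :=
  InGrid land p ∧ lgetI land p.1 p.2 = 1 ∧ lgetI m0 p.1 p.2 = 0

def Nbrs (p : Int × Int) : List (Int × Int) :=
  [(p.1, p.2 + 1), (p.1, p.2 - 1), (p.1 + 1, p.2), (p.1 - 1, p.2)]

def Adj (p q : Int × Int) : Prop := q ∈ Nbrs p

inductive Reach (land m0 : List (List Int)) (s : Int × Int) : (Int × Int) → Prop
  | base : Reach land m0 s s
  | step {p q : Int × Int} : Reach land m0 s p → Adj p q → FreeC land m0 q → Reach land m0 s q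

def Dims (land m : List (List Int)) : Prop :=
  m.length = land.length ∧ ∀ row ∈ m, row.length = (land.headI).length

def FreeCb (land m0 : List (List Int)) (p : Int × Int) : Bool :=
  decide (0 ≤ p.1) && decide (p.1 < (land.length : Int)) && decide (0 ≤ p.2)
    && decide (p.2 < ((land.headI).length : Int))
    && (lgetI land p.1 p.2 == 1) && (lgetI m0 p.1 p.2 == 0)

lemma FreeCb_iff (land m0 : List (List Int)) (p : Int × Int) :
    FreeCb land m0 p = true ↔ FreeC land m0 p := by
  simp [FreeCb, FreeC, InGrid, and_assoc]

def gridF (land : List (List Int)) : Finset (Int × Int) :=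
  (Finset.range land.length ×ˢ Finset.range (land.headI).length).image
    (fun p => ((p.1 : Int), (p.2 : Int)))

def freeF (land m0 : List (List Int)) : Finset (Int × Int) :=
  (gridF land).filter (fun p => FreeCb land m0 p = true)

lemma mem_gridF (land : List (List Int)) (p : Int × Int) :
    p ∈ gridF land ↔ InGrid land p := by
  simp only [gridF, Finset.mem_image, Finset.mem_product, Finset.mem_range, InGrid]
  constructor
  · rintro ⟨⟨a, b⟩, ⟨ha, hb⟩, rfl⟩
    refine ⟨by positivity, by simpa using (Int.ofNat_lt.mpr ha), by positivity,
      by simpa using (Int.ofNat_lt.mpr hb)⟩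
  · rintro ⟨h1, h2, h3, h4⟩
    refine ⟨(p.1.toNat, p.2.toNat), ⟨by omega, by omega⟩, ?_⟩
    simp only [Int.toNat_of_nonneg h1, Int.toNat_of_nonneg h3]

lemma mem_freeF (land m0 : List (List Int)) (p : Int × Int) :
    p ∈ freeF land m0 ↔ FreeC land m0 p := by
  simp only [freeF, Finset.mem_filter, mem_gridF, FreeCb_iff]
  constructor
  · exact fun h => h.2
  · exact fun h => ⟨h.1, h⟩

lemma card_freeF_le (land m0 : List (List Int)) :
    (freeF land m0).card ≤ land.length * (land.headI).length := by
  calc (freeF land m0).card ≤ (gridF land).card := Finset.card_le_card (Finset.filter_subset _ _)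
    _ ≤ _ := by
        refine le_trans (Finset.card_image_le) ?_
        simp [Finset.card_product]

-- ---- matrix get/set lemmas ----
lemma getD_set_list {α : Type} (l : List α) (i j : Nat) (a : α) (d : α) (hi : i < l.length) :
    (l.set i a).getD j d = if j = i then a else l.getD j d := by
  by_cases h : j = i
  · subst h
    simp [List.getD_eq_getElem?_getD, hi]
  · simp [List.getD_eq_getElem?_getD, List.getElem?_set_ne (by omega : i ≠ j), h]

lemma dims_msetI (land m : List (List Int)) (n : Int × Int) (v : Int)
    (h : Dims land m) (hn : InGrid land n) : Dims land (msetI m n.1 n.2 v) := by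
  obtain ⟨hl, hr⟩ := h
  obtain ⟨h1, h2, h3, h4⟩ := hn
  constructor
  · simp [msetI, hl]
  · intro row hrow
    simp only [msetI] at hrow
    rcases List.mem_or_eq_of_mem_set hrow with h | h
    · exact hr row h
    · subst h
      rw [List.length_set]
      have hlt : n.1.toNat < m.length := by omega
      rw [List.getD_eq_getElem _ _ hlt]
      exact hr _ (List.getElem_mem hlt)

lemma lgetI_msetI (land m : List (List Int)) (hm : Dims land m) (p n : Int × Int)
    (hp : InGrid land p) (hn : InGrid land n) (v : Int) :
    lgetI (msetI m n.1 n.2 v) p.1 p.2 = if p = n then v else lgetI m p.1 p.2 := by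
  obtain ⟨hl, hr⟩ := hm
  obtain ⟨hp1, hp2, hp3, hp4⟩ := hp
  obtain ⟨hn1, hn2, hn3, hn4⟩ := hn
  have hnlt : n.1.toNat < m.length := by omega
  have hrowlen : (m.getD n.1.toNat []).length = (land.headI).length := by
    have hlt : n.1.toNat < m.length := by omega
    rw [List.getD_eq_getElem _ _ hlt]
    exact hr _ (List.getElem_mem hlt)
  simp only [lgetI, msetI]
  rw [getD_set_list _ _ _ _ _ hnlt]
  by_cases hrow : p.1.toNat = n.1.toNat
  · rw [if_pos hrow]
    rw [getD_set_list _ _ _ _ _ (by omega)]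
    by_cases hcol : p.2.toNat = n.2.toNat
    · have : p = n := by
        exact Prod.ext (by omega) (by omega)
      simp [this]
    · have hpn : p ≠ n := by
        intro h; subst h; exact hcol rfl
      simp [hcol, hpn, hrow]
  · have hpn : p ≠ n := by
      intro h; subst h; exact hrow rfl
    simp [hrow, hpn]

-- generic fold congruence with an invariant
lemma foldl_rel {α σ : Type} (P : σ → Prop) (f g : σ → α → σ) :
    ∀ (l : List α) (st : σ), P st →
      (∀ st' a, a ∈ l → P st' → f st' a = g st' a ∧ P (f st' a)) →
      List.foldl f st l = List.foldl g st l ∧ P (List.foldl f st l) := by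
  intro l
  induction l with
  | nil => intro st h _; exact ⟨rfl, h⟩
  | cons a l ih =>
    intro st h hstep
    obtain ⟨heq, hP⟩ := hstep st a (by simp) h
    simp only [List.foldl_cons]
    rw [← heq]
    exact ih (f st a) hP (fun st' b hb hP' => hstep st' b (by simp [hb]) hP')

-- ---- the BFS loop invariant core ----
structure FloodCore (land m0 : List (List Int)) (s : Int × Int) (id : Int)
    (S : Finset (Int × Int)) (m : List (List Int)) : Prop where
  dims : Dims land m
  pw : ∀ p : Int × Int, InGrid land p →
    lgetI m p.1 p.2 = if p ∈ S then id else lgetI m0 p.1 p.2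
  free : ∀ p ∈ S, FreeC land m0 p
  reach : ∀ p ∈ S, Reach land m0 s p
  smem : s ∈ S

lemma core_card_le (land m0 : List (List Int)) (s : Int × Int) (id : Int)
    (S : Finset (Int × Int)) (m : List (List Int)) (hc : FloodCore land m0 s id S m) :
    S.card ≤ (freeF land m0).card := by
  apply Finset.card_le_card
  intro p hp
  exact (mem_freeF land m0 p).mpr (hc.free p hp)

lemma cond_iff (land m0 : List (List Int)) (s : Int × Int) (id : Int)
    (S : Finset (Int × Int)) (m : List (List Int))
    (hc : FloodCore land m0 s id S m) (hid : id ≠ 0) (n : Int × Int) :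
    (0 ≤ n.1 ∧ n.1 < (land.length : Int) ∧ 0 ≤ n.2 ∧ n.2 < ((land.headI).length : Int)
      ∧ lgetI m n.1 n.2 = 0 ∧ lgetI land n.1 n.2 = 1)
    ↔ (FreeC land m0 n ∧ n ∉ S) := by
  constructor
  · rintro ⟨h1, h2, h3, h4, h5, h6⟩
    have hg : InGrid land n := ⟨h1, h2, h3, h4⟩
    have := hc.pw n hg
    by_cases hn : n ∈ S
    · rw [if_pos hn] at this; rw [this] at h5; exact absurd h5 hid
    · rw [if_neg hn] at this
      exact ⟨⟨hg, h6, by rw [← this]; exact h5⟩, hn⟩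
  · rintro ⟨⟨hg, hland, hm0⟩, hn⟩
    have := hc.pw n hg
    rw [if_neg hn] at this
    exact ⟨hg.1, hg.2.1, hg.2.2.1, hg.2.2.2, by rw [this]; exact hm0, hland⟩

lemma reach_sub (land m0 : List (List Int)) (s : Int × Int) (S : Finset (Int × Int))
    (hcl : ∀ p ∈ S, ∀ q, Adj p q → FreeC land m0 q → q ∈ S) (hs : s ∈ S) :
    ∀ p, Reach land m0 s p → p ∈ S := by
  intro p hp
  induction hp with
  | base => exact hs
  | step h hadj hfree ih => exact hcl _ ih _ hadj hfree

-- processing the four neighbours of a popped cell x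
lemma fold_try (land m0 : List (List Int)) (s : Int × Int) (id : Int) (hid : id ≠ 0)
    (x : Int × Int) (hxr : Reach land m0 s x) :
    ∀ (ns : List (Int × Int)), (∀ n ∈ ns, Adj x n) →
    ∀ (S : Finset (Int × Int)) (m : List (List Int)) (q0 : List (Int × Int)),
      FloodCore land m0 s id S m →
      ∃ S' m' q1,
        List.foldl (bfsStep land id x.1 x.2) (m, q0, (S.card : Int))
            (ns.map (fun n => (n.1 - x.1, n.2 - x.2)))
          = (m', q0 ++ q1, (S'.card : Int)) ∧
        FloodCore land m0 s id S' m' ∧ S ⊆ S' ∧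
        (∀ p ∈ q1, p ∈ S') ∧ (∀ p ∈ S', p ∈ S ∨ p ∈ q1) ∧
        (∀ n ∈ ns, FreeC land m0 n → n ∈ S') ∧
        S'.card = S.card + q1.length := by
  intro ns
  induction ns with
  | nil =>
    intro _ S m q0 hc
    exact ⟨S, m, [], by simp, hc, Finset.Subset.refl S, by simp, fun p hp => Or.inl hp,
      by simp, by simp⟩
  | cons n ns ih =>
    intro hadj S m q0 hc
    have hadjn : Adj x n := hadj n (by simp)
    have hadjns : ∀ k ∈ ns, Adj x k := fun k hk => hadj k (by simp [hk])
    simp only [List.map_cons, List.foldl_cons]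
    have hxn : (x.1 + (n.1 - x.1), x.2 + (n.2 - x.2)) = n := by
      exact Prod.ext (by ring) (by ring)
    have hcond := cond_iff land m0 s id S m hc hid n
    by_cases hC : FreeC land m0 n ∧ n ∉ S
    · -- the neighbour is newly marked
      obtain ⟨hfree, hnot⟩ := hC
      have hstep : bfsStep land id x.1 x.2 (m, q0, (S.card : Int)) (n.1 - x.1, n.2 - x.2)
          = (msetI m n.1 n.2 id, q0 ++ [n], (S.card : Int) + 1) := by
        simp only [bfsStep]
        rw [show x.1 + (n.1 - x.1) = n.1 from by ring,
          show x.2 + (n.2 - x.2) = n.2 from by ring]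
        rw [if_pos (hcond.mpr ⟨hfree, hnot⟩)]
      have hcard : ((S.card : Int) + 1) = (((insert n S).card : Int)) := by
        rw [Finset.card_insert_of_notMem hnot]; push_cast; ring
      have hcore' : FloodCore land m0 s id (insert n S) (msetI m n.1 n.2 id) := by
        refine ⟨dims_msetI land m n id hc.dims hfree.1, ?_, ?_, ?_, ?_⟩
        · intro p hp
          rw [lgetI_msetI land m hc.dims p n hp hfree.1 id]
          by_cases hpn : p = n
          · simp [hpn]
          · rw [if_neg hpn, hc.pw p hp]
            by_cases hps : p ∈ S
            · rw [if_pos hps, if_pos (Finset.mem_insert_of_mem hps)]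
            · rw [if_neg hps, if_neg (by simp [Finset.mem_insert, hpn, hps])]
        · intro p hp
          rcases Finset.mem_insert.mp hp with h | h
          · subst h; exact hfree
          · exact hc.free p h
        · intro p hp
          rcases Finset.mem_insert.mp hp with h | h
          · subst h; exact Reach.step hxr hadjn hfree
          · exact hc.reach p h
        · exact Finset.mem_insert_of_mem hc.smem
      rw [hstep, hcard]
      obtain ⟨S', m', q1, heq, hcore'', hsub, hq1, hdec, hns, hcd⟩ :=
        ih hadjns (insert n S) (msetI m n.1 n.2 id) (q0 ++ [n]) hcore'
      refine ⟨S', m', n :: q1, ?_, hcore'', ?_, ?_, ?_, ?_, ?_⟩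
      · rw [heq]; simp
      · exact fun p hp => hsub (Finset.mem_insert_of_mem hp)
      · intro p hp
        rcases List.mem_cons.mp hp with h | h
        · rw [h]; exact hsub (Finset.mem_insert_self n S)
        · exact hq1 p h
      · intro p hp
        rcases hdec p hp with h | h
        · rcases Finset.mem_insert.mp h with h' | h'
          · subst h'; exact Or.inr (by simp)
          · exact Or.inl h'
        · exact Or.inr (by simp [h])
      · intro k hk hkf
        rcases List.mem_cons.mp hk with h | h
        · rw [h]; exact hsub (Finset.mem_insert_self n S)
        · exact hns k h hkf
      · rw [hcd, Finset.card_insert_of_notMem hnot]; simp; omega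
    · -- no marking: the state is unchanged
      have hstep : bfsStep land id x.1 x.2 (m, q0, (S.card : Int)) (n.1 - x.1, n.2 - x.2)
          = (m, q0, (S.card : Int)) := by
        simp only [bfsStep]
        rw [show x.1 + (n.1 - x.1) = n.1 from by ring,
          show x.2 + (n.2 - x.2) = n.2 from by ring]
        rw [if_neg (fun h => hC (hcond.mp h))]
      rw [hstep]
      obtain ⟨S', m', q1, heq, hcore'', hsub, hq1, hdec, hns, hcd⟩ := ih hadjns S m q0 hc
      refine ⟨S', m', q1, heq, hcore'', hsub, hq1, hdec, ?_, hcd⟩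
      intro k hk hkf
      rcases List.mem_cons.mp hk with h | h
      · subst h
        by_cases hmem : k ∈ S
        · exact hsub hmem
        · exact absurd ⟨hkf, hmem⟩ hC
      · exact hns k h hkf

lemma Nbrs_map (x : Int × Int) :
    (Nbrs x).map (fun n => (n.1 - x.1, n.2 - x.2))
      = [((0 : Int), (1 : Int)), (0, -1), (1, 0), (-1, 0)] := by
  simp [Nbrs]

-- one pop of the worklist: x is removed, its free unvisited neighbours are marked and appended
lemma pop_step (land m0 : List (List Int)) (s : Int × Int) (id : Int) (hid : id ≠ 0)
    (S : Finset (Int × Int)) (m : List (List Int)) (x : Int × Int) (q0 : List (Int × Int))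
    (hc : FloodCore land m0 s id S m) (hq0 : ∀ p ∈ q0, p ∈ S) (hx : x ∈ S)
    (hcl : ∀ p ∈ S, (p ∈ q0 ∨ p = x) ∨ ∀ q, Adj p q → FreeC land m0 q → q ∈ S) :
    ∃ S' m' q1,
      List.foldl (bfsStep land id x.1 x.2) (m, q0, (S.card : Int))
          [((0 : Int), (1 : Int)), (0, -1), (1, 0), (-1, 0)]
        = (m', q0 ++ q1, (S'.card : Int)) ∧
      FloodCore land m0 s id S' m' ∧
      (∀ p ∈ q0 ++ q1, p ∈ S') ∧
      (∀ p ∈ S', p ∈ q0 ++ q1 ∨ ∀ q, Adj p q → FreeC land m0 q → q ∈ S') ∧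
      S'.card = S.card + q1.length := by
  obtain ⟨S', m', q1, heq, hcore', hsub, hq1, hdec, hns, hcd⟩ :=
    fold_try land m0 s id hid x (hc.reach x hx) (Nbrs x) (fun n hn => hn) S m q0 hc
  rw [Nbrs_map] at heq
  refine ⟨S', m', q1, heq, hcore', ?_, ?_, hcd⟩
  · intro p hp
    rcases List.mem_append.mp hp with h | h
    · exact hsub (hq0 p h)
    · exact hq1 p h
  · intro p hp
    rcases hdec p hp with h | h
    · rcases hcl p h with h' | h'
      · rcases h' with h' | h'
        · exact Or.inl (List.mem_append.mpr (Or.inl h'))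
        · exact Or.inr (fun q hq hf => hns q (h' ▸ hq) hf)
      · exact Or.inr (fun q hq hf => hsub (h' q hq hf))
    · exact Or.inl (List.mem_append.mpr (Or.inr h))

def LoopOut (land m0 : List (List Int)) (s : Int × Int) (id : Int)
    (out : List (List Int) × Int) : Prop :=
  ∃ S' m', out = (m', (S'.card : Int)) ∧ FloodCore land m0 s id S' m' ∧
    (∀ p, p ∈ S' ↔ Reach land m0 s p)

lemma terminal_out (land m0 : List (List Int)) (s : Int × Int) (id : Int)
    (S : Finset (Int × Int)) (m : List (List Int)) (hc : FloodCore land m0 s id S m)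
    (hcl : ∀ p ∈ S, ∀ q, Adj p q → FreeC land m0 q → q ∈ S) :
    LoopOut land m0 s id (m, (S.card : Int)) := by
  refine ⟨S, m, rfl, hc, fun p => ⟨hc.reach p, reach_sub land m0 s S hcl hc.smem p⟩⟩

lemma bfsLoop_spec (land m0 : List (List Int)) (s : Int × Int) (id : Int) (hid : id ≠ 0) :
    ∀ (fuel : Nat) (S : Finset (Int × Int)) (m : List (List Int)) (Q : List (Int × Int)),
      FloodCore land m0 s id S m → (∀ p ∈ Q, p ∈ S) →
      (∀ p ∈ S, p ∈ Q ∨ ∀ q, Adj p q → FreeC land m0 q → q ∈ S) →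
      Q.length + 2 * ((freeF land m0).card - S.card) ≤ fuel →
      LoopOut land m0 s id (bfsLoop land id fuel m Q (S.card : Int)) := by
  intro fuel
  induction fuel with
  | zero =>
    intro S m Q hc hq hcl hm
    have hQ : Q = [] := by
      cases Q with
      | nil => rfl
      | cons a as => simp at hm
    subst hQ
    exact terminal_out land m0 s id S m hc (fun p hp => (hcl p hp).resolve_left (by simp))
  | succ f ih =>
    intro S m Q hc hq hcl hm
    cases Q with
    | nil =>
      exact terminal_out land m0 s id S m hc (fun p hp => (hcl p hp).resolve_left (by simp))
    | cons x rest =>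
      obtain ⟨S', m', q1, heq, hcore', hq', hcl', hcd⟩ :=
        pop_step land m0 s id hid S m x rest hc (fun p hp => hq p (by simp [hp]))
          (hq x (by simp))
          (fun p hp => by
            rcases hcl p hp with h | h
            · rcases List.mem_cons.mp h with h' | h'
              · exact Or.inl (Or.inr h')
              · exact Or.inl (Or.inl h')
            · exact Or.inr h)
      have hle : S'.card ≤ (freeF land m0).card := core_card_le land m0 s id S' m' hcore'
      simp only [bfsLoop, heq]
      exact ih S' m' (rest ++ q1) hcore' hq' hcl'
        (by simp only [List.length_append]
            simp only [List.length_cons] at hm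
            omega)

lemma core_init (land m0 : List (List Int)) (s : Int × Int) (id : Int)
    (hd : Dims land m0) (hs : FreeC land m0 s) :
    FloodCore land m0 s id {s} (msetI m0 s.1 s.2 id) := by
  refine ⟨dims_msetI land m0 s id hd hs.1, ?_, ?_, ?_, Finset.mem_singleton_self s⟩
  · intro p hp
    rw [lgetI_msetI land m0 hd p s hp hs.1 id]
    by_cases hpn : p = s
    · simp [hpn]
    · simp [hpn, Finset.mem_singleton]
  · intro p hp
    rw [Finset.mem_singleton] at hp; subst hp; exact hs
  · intro p hp
    rw [Finset.mem_singleton] at hp; subst hp; exact Reach.base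

-- the bfs call, characterised
lemma bfs_spec (land m0 : List (List Int)) (s : Int × Int) (id : Int) (hid : id ≠ 0)
    (hd : Dims land m0) (hs : FreeC land m0 s) :
    LoopOut land m0 s id (bfs land m0 s.1 s.2 id) := by
  have hc := core_init land m0 s id hd hs
  have hflt : (freeF land m0).card ≤ land.length * (land.headI).length :=
    card_freeF_le land m0
  have harea : (1 : Int) = ((({s} : Finset (Int × Int)).card : Int)) := by simp
  unfold bfs
  rw [harea]
  refine bfsLoop_spec land m0 s id hid _ _ _ _ hc (by simp) (by simp) ?_
  simp only [List.length_cons, List.length_nil, Finset.card_singleton]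
  have h2 : 2 * land.length * (land.headI).length
      = 2 * (land.length * (land.headI).length) := by ring
  omega


-- ---- plain connectivity (over A's initial all-zero matrix) ----
def zmat (land : List (List Int)) : List (List Int) :=
  land.map (fun _ => List.replicate (land.headI).length (0 : Int))

lemma lgetI_zmat (land : List (List Int)) (r c : Int) : lgetI (zmat land) r c = 0 := by
  simp only [lgetI, zmat, List.getD_eq_getElem?_getD, List.getElem?_map]
  rcases h : land[r.toNat]? with _ | row
  · simp
  · simp [List.getElem?_replicate]
    split_ifs <;> rfl

lemma dims_zmat (land : List (List Int)) : Dims land (zmat land) := by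
  constructor
  · simp [zmat]
  · intro row hrow
    simp only [zmat, List.mem_map] at hrow
    obtain ⟨_, _, h⟩ := hrow
    simp [← h]

def FreeP (land : List (List Int)) (p : Int × Int) : Prop :=
  InGrid land p ∧ lgetI land p.1 p.2 = 1

lemma freeC_zmat (land : List (List Int)) (p : Int × Int) :
    FreeC land (zmat land) p ↔ FreeP land p := by
  unfold FreeC FreeP
  simp [lgetI_zmat]

lemma reach_trans (land m0 : List (List Int)) (s p q : Int × Int)
    (h1 : Reach land m0 s p) (h2 : Reach land m0 p q) : Reach land m0 s q := by
  induction h2 with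
  | base => exact h1
  | step h hadj hfree ih => exact Reach.step ih hadj hfree

lemma reach_freeC (land m0 : List (List Int)) (s p : Int × Int)
    (hs : FreeC land m0 s) (h : Reach land m0 s p) : FreeC land m0 p := by
  induction h with
  | base => exact hs
  | step _ _ hfree _ => exact hfree

lemma adj_symm (p q : Int × Int) (h : Adj p q) : Adj q p := by
  simp only [Adj, Nbrs, List.mem_cons, List.not_mem_nil, or_false] at h ⊢
  rcases h with h | h | h | h <;> subst h <;> simp [Prod.ext_iff]

lemma reach_symm (land m0 : List (List Int)) (s p : Int × Int)
    (hs : FreeC land m0 s) (h : Reach land m0 s p) : Reach land m0 p s := by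
  induction h with
  | base => exact Reach.base
  | @step x q hx hadj hfree ih =>
    refine reach_trans land m0 q x s ?_ ih
    exact Reach.step Reach.base (adj_symm x q hadj) (reach_freeC land m0 s x hs hx)

-- ---- phase 1 of A: invariant of the labelling scan ----
structure Inv1 (land : List (List Int))
    (st : List (List Int) × PySem.Dict Int Int × Int) : Prop where
  dims : Dims land st.1
  pos : 1 ≤ st.2.2
  bound : ∀ p, InGrid land p → 0 ≤ lgetI st.1 p.1 p.2 ∧ lgetI st.1 p.1 p.2 < st.2.2
  lfree : ∀ p, InGrid land p → lgetI st.1 p.1 p.2 ≠ 0 → FreeP land p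
  closed : ∀ p q, InGrid land p → lgetI st.1 p.1 p.2 ≠ 0 →
    Reach land (zmat land) p q → lgetI st.1 q.1 q.2 = lgetI st.1 p.1 p.2
  inj : ∀ p q, InGrid land p → InGrid land q → lgetI st.1 p.1 p.2 ≠ 0 →
    lgetI st.1 p.1 p.2 = lgetI st.1 q.1 q.2 → Reach land (zmat land) p q
  dict : ∀ p, InGrid land p → lgetI st.1 p.1 p.2 ≠ 0 →
    ∃ S : Finset (Int × Int), (∀ q, q ∈ S ↔ Reach land (zmat land) p q) ∧
      st.2.1.getD (lgetI st.1 p.1 p.2) 0 = (S.card : Int)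

def stepA (land : List (List Int)) (row col : Nat)
    (st : List (List Int) × PySem.Dict Int Int × Int) :
    List (List Int) × PySem.Dict Int Int × Int :=
  if lgetI land row col = 1 ∧ lgetI st.1 row col = 0 then
    let res := bfs land st.1 row col st.2.2
    (res.1, st.2.1.insert st.2.2 res.2, st.2.2 + 1)
  else st

lemma inv1_step (land : List (List Int)) (row col : Nat)
    (st : List (List Int) × PySem.Dict Int Int × Int)
    (hrow : row < land.length) (hcol : col < (land.headI).length) (hI : Inv1 land st) :
    Inv1 land (stepA land row col st)
    ∧ (∀ p, InGrid land p → lgetI st.1 p.1 p.2 ≠ 0 →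
        lgetI (stepA land row col st).1 p.1 p.2 = lgetI st.1 p.1 p.2)
    ∧ (FreeP land ((row : Int), (col : Int)) →
        lgetI (stepA land row col st).1 row col ≠ 0) := by
  have hg : InGrid land ((row : Int), (col : Int)) := by
    refine ⟨by positivity, by simpa using (Int.ofNat_lt.mpr hrow), by positivity,
      by simpa using (Int.ofNat_lt.mpr hcol)⟩
  by_cases hcond : lgetI land row col = 1 ∧ lgetI st.1 row col = 0
  case neg =>
    have hst : stepA land row col st = st := by
      unfold stepA; rw [if_neg hcond]
    rw [hst]
    refine ⟨hI, fun _ _ _ => rfl, ?_⟩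
    intro hf hz
    exact hcond ⟨hf.2, hz⟩
  case pos =>
    obtain ⟨hland, hm0⟩ := hcond
    have hid : st.2.2 ≠ 0 := by have := hI.pos; omega
    have hfp : FreeP land ((row : Int), (col : Int)) := ⟨hg, hland⟩
    have hsz : FreeC land (zmat land) ((row : Int), (col : Int)) := (freeC_zmat _ _).mpr hfp
    have hfm : FreeC land st.1 ((row : Int), (col : Int)) := ⟨hg, hland, hm0⟩
    -- the component of the seed is entirely unlabelled
    have hunlab : ∀ q, Reach land (zmat land) ((row : Int), (col : Int)) q →
        lgetI st.1 q.1 q.2 = 0 := by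
      intro q hq
      by_contra hne
      have hqf : FreeC land (zmat land) q := reach_freeC _ _ _ _ hsz hq
      have := hI.closed q ((row : Int), (col : Int)) hqf.1 hne
        (reach_symm _ _ _ _ hsz hq)
      rw [this] at hm0
      exact hne hm0
    -- reachability over st.1 from the seed agrees with plain reachability
    have htrans : ∀ q, Reach land st.1 ((row : Int), (col : Int)) q ↔
        Reach land (zmat land) ((row : Int), (col : Int)) q := by
      intro q
      constructor
      · intro h
        induction h with
        | base => exact Reach.base
        | step _ hadj hfree ih =>
          exact Reach.step ih hadj ⟨hfree.1, hfree.2.1, lgetI_zmat land _ _⟩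
      · intro h
        induction h with
        | base => exact Reach.base
        | @step x q hx hadj hfree ih =>
          refine Reach.step ih hadj ⟨hfree.1, hfree.2.1, ?_⟩
          exact hunlab q (Reach.step hx hadj hfree)
    obtain ⟨S, m', heq, hcore, hchar⟩ :=
      bfs_spec land st.1 ((row : Int), (col : Int)) st.2.2 hid hI.dims hfm
    simp only at heq
    have hchar' : ∀ q, q ∈ S ↔ Reach land (zmat land) ((row : Int), (col : Int)) q := by
      intro q; rw [hchar q, htrans q]
    have hSfree : ∀ p ∈ S, FreeP land p := by
      intro p hp
      exact (freeC_zmat _ _).mp (reach_freeC _ _ _ _ hsz ((hchar' p).mp hp))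
    have hsS : ((row : Int), (col : Int)) ∈ S := hcore.smem
    have hst : stepA land row col st = (m', st.2.1.insert st.2.2 (S.card : Int), st.2.2 + 1) := by
      unfold stepA
      rw [if_pos ⟨hland, hm0⟩]
      simp only [heq]
    have mpw : ∀ p, InGrid land p →
        lgetI m' p.1 p.2 = if p ∈ S then st.2.2 else lgetI st.1 p.1 p.2 := hcore.pw
    -- labelled cells outside S keep their labels; S was unlabelled
    have hSun : ∀ p, InGrid land p → lgetI st.1 p.1 p.2 ≠ 0 → p ∉ S := by
      intro p hp hne hmem
      exact hne (hunlab p ((hchar' p).mp hmem))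
    rw [hst]
    refine ⟨?_, ?_, ?_⟩
    · refine ⟨hcore.dims, by have := hI.pos; simp only; omega, ?_, ?_, ?_, ?_, ?_⟩
      · intro p hp
        simp only
        rw [mpw p hp]
        split_ifs with h
        · have := hI.pos; omega
        · have := hI.bound p hp; omega
      · intro p hp hne
        rw [mpw p hp] at hne
        split_ifs at hne with h
        · exact hSfree p h
        · exact hI.lfree p hp hne
      · intro p q hp hne hr
        have hqz : FreeC land (zmat land) q := by
          rw [mpw p hp] at hne
          split_ifs at hne with h
          · exact reach_freeC _ _ _ _ ((freeC_zmat _ _).mpr (hSfree p h)) hr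
          · exact reach_freeC _ _ _ _ ((freeC_zmat _ _).mpr (hI.lfree p hp hne)) hr
        have hq : InGrid land q := hqz.1
        rw [mpw p hp] at hne ⊢
        rw [mpw q hq]
        by_cases h : p ∈ S
        · have hsq : Reach land (zmat land) ((row : Int), (col : Int)) q :=
            reach_trans _ _ _ _ _ ((hchar' p).mp h) hr
          rw [if_pos h, if_pos ((hchar' q).mpr hsq)]
        · rw [if_neg h] at hne ⊢
          have hqS : q ∉ S := by
            intro hmem
            have hqp : Reach land (zmat land) q p :=
              reach_symm _ _ _ _ ((freeC_zmat _ _).mpr (hI.lfree p hp hne)) hr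
            exact h ((hchar' p).mpr
              (reach_trans _ _ _ _ _ ((hchar' q).mp hmem) hqp))
          rw [if_neg hqS]
          exact hI.closed p q hp hne hr
      · intro p q hp hq hne heq'
        rw [mpw p hp] at hne heq'
        rw [mpw q hq] at heq'
        by_cases h1 : p ∈ S <;> by_cases h2 : q ∈ S
        · rw [if_pos h1] at heq'
          exact reach_trans _ _ _ _ _
            (reach_symm _ _ _ _ hsz ((hchar' p).mp h1)) ((hchar' q).mp h2)
        · rw [if_pos h1, if_neg h2] at heq'
          have := hI.bound q hq; omega
        · rw [if_neg h1, if_pos h2] at heq'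
          have := hI.bound p hp
          rw [if_neg h1] at hne
          omega
        · rw [if_neg h1] at heq' hne
          rw [if_neg h2] at heq'
          exact hI.inj p q hp hq hne heq'
      · intro p hp hne
        rw [mpw p hp] at hne ⊢
        by_cases h : p ∈ S
        · rw [if_pos h]
          refine ⟨S, ?_, ?_⟩
          · intro q
            rw [hchar' q]
            constructor
            · exact fun hq => reach_trans _ _ _ _ _
                (reach_symm _ _ _ _ hsz ((hchar' p).mp h)) hq
            · exact fun hq => reach_trans _ _ _ _ _ ((hchar' p).mp h) hq
          · simp [PySem.Dict.getD_insert_self]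
        · rw [if_neg h] at hne ⊢
          obtain ⟨T, hT, hTd⟩ := hI.dict p hp hne
          refine ⟨T, hT, ?_⟩
          rw [PySem.Dict.getD_insert_of_ne]
          · exact hTd
          · have := hI.bound p hp; omega
    · intro p hp hne
      simp only
      rw [mpw p hp, if_neg (hSun p hp hne)]
    · intro _
      simp only
      have := mpw ((row : Int), (col : Int)) hg
      simp only at this
      rw [this, if_pos hsS]
      exact hid

-- fold over List.range with an index-carrying invariant
lemma foldl_range_ind {σ : Type} (f : σ → Nat → σ) (P : Nat → σ → Prop) (n : Nat) (init : σ)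
    (h0 : P 0 init) (hs : ∀ i s, i < n → P i s → P (i + 1) (f s i)) :
    P n ((List.range n).foldl f init) := by
  induction n with
  | zero => simpa using h0
  | succ k ih =>
    rw [List.range_succ, List.foldl_append]
    exact hs k _ (Nat.lt_succ_self k) (ih (fun i s hi hp => hs i s (Nat.lt_succ_of_lt hi) hp))

-- the final state of A's labelling scan
lemma phase1_final (land : List (List Int)) :
    Inv1 land ((List.range land.length).foldl (fun st (row : Nat) =>
      (List.range (land.headI).length).foldl (fun st (col : Nat) => stepA land row col st) st)
      (zmat land, (PySem.Dict.empty : PySem.Dict Int Int), (1 : Int)))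
    ∧ (∀ p, FreeP land p →
        lgetI ((List.range land.length).foldl (fun st (row : Nat) =>
          (List.range (land.headI).length).foldl (fun st (col : Nat) => stepA land row col st) st)
          (zmat land, (PySem.Dict.empty : PySem.Dict Int Int), (1 : Int))).1 p.1 p.2 ≠ 0) := by
  have hinit : Inv1 land (zmat land, (PySem.Dict.empty : PySem.Dict Int Int), (1 : Int)) := by
    refine ⟨dims_zmat land, le_refl 1, ?_, ?_, ?_, ?_, ?_⟩
    · intro p _; simp [lgetI_zmat]
    · intro p _ hne; exact absurd (lgetI_zmat land p.1 p.2) hne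
    · intro p q _ hne; exact absurd (lgetI_zmat land p.1 p.2) hne
    · intro p q _ _ hne; exact absurd (lgetI_zmat land p.1 p.2) hne
    · intro p _ hne; exact absurd (lgetI_zmat land p.1 p.2) hne
  have hmain := foldl_range_ind (fun st (row : Nat) =>
      (List.range (land.headI).length).foldl (fun st (col : Nat) => stepA land row col st) st)
    (fun R0 st => Inv1 land st ∧
      ∀ p, FreeP land p → p.1 < (R0 : Int) → lgetI st.1 p.1 p.2 ≠ 0)
    land.length
    (zmat land, (PySem.Dict.empty : PySem.Dict Int Int), (1 : Int))
    ⟨hinit, by intro p hf h; have h0 := hf.1.1; exfalso; push_cast at h; omega⟩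
    ?_
  · refine ⟨hmain.1, ?_⟩
    intro p hf
    exact hmain.2 p hf hf.1.2.1
  · intro row st hrow hP
    have hinner := foldl_range_ind (fun st (col : Nat) => stepA land row col st)
      (fun C0 st => Inv1 land st ∧
        ∀ p, FreeP land p →
          (p.1 < (row : Int) ∨ (p.1 = (row : Int) ∧ p.2 < (C0 : Int))) →
          lgetI st.1 p.1 p.2 ≠ 0)
      (land.headI).length st
      ⟨hP.1, by
        intro p hf hor
        rcases hor with h | ⟨_, h⟩
        · exact hP.2 p hf h
        · have := hf.1.2.2.1; omega⟩
      ?_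
    · refine ⟨hinner.1, ?_⟩
      intro p hf hlt
      refine hinner.2 p hf ?_
      have h1 := hf.1.2.1
      have h4 := hf.1.2.2.2
      by_cases h : p.1 = (row : Int)
      · exact Or.inr ⟨h, h4⟩
      · left; omega
    · intro col st' hcol hQ
      obtain ⟨hI', hmono, hnew⟩ := inv1_step land row col st' hrow hcol hQ.1
      refine ⟨hI', ?_⟩
      intro p hf hor
      by_cases hold : p.1 < (row : Int) ∨ (p.1 = (row : Int) ∧ p.2 < (col : Int))
      · have hne := hQ.2 p hf hold
        rw [hmono p hf.1 hne]
        exact hne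
      · have hp1 : p.1 = (row : Int) ∧ p.2 = (col : Int) := by
          push_cast at hor hold ⊢
          omega
        have hpe : p = ((row : Int), (col : Int)) := Prod.ext hp1.1 hp1.2
        rw [hpe]
        exact hnew (hpe ▸ hf)


-- ---- free-cell connectivity, Nat-coordinate view ----
def cellN (r c : Nat) : Int × Int := ((r : Int), (c : Int))

def ConnP (land : List (List Int)) (p q : Int × Int) : Prop :=
  FreeP land p ∧ FreeP land q ∧ Reach land (zmat land) p q

lemma connP_symm (land : List (List Int)) (p q : Int × Int) (h : ConnP land p q) :
    ConnP land q p :=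
  ⟨h.2.1, h.1, reach_symm _ _ _ _ ((freeC_zmat _ _).mpr h.1) h.2.2⟩

lemma connP_trans (land : List (List Int)) (p q t : Int × Int)
    (h1 : ConnP land p q) (h2 : ConnP land q t) : ConnP land p t :=
  ⟨h1.1, h2.2.1, reach_trans _ _ _ _ _ h1.2.2 h2.2.2⟩

lemma inGrid_cellN (land : List (List Int)) (r c : Nat) :
    InGrid land (cellN r c) ↔ r < land.length ∧ c < (land.headI).length := by
  simp only [InGrid, cellN]
  omega

lemma connP_adj (land : List (List Int)) (p q : Int × Int)
    (hp : FreeP land p) (hq : FreeP land q) (hadj : Adj p q) : ConnP land p q :=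
  ⟨hp, hq, Reach.step Reach.base hadj ((freeC_zmat _ _).mpr hq)⟩

-- ---- union-find forest: pointer lemmas ----
def PtrLe (parent : List Nat) : Prop := ∀ j, parent.getD j 0 ≤ j

lemma ptrLe_of_lt (parent : List Nat)
    (h : ∀ j, j < parent.length → parent.getD j 0 ≤ j) : PtrLe parent := by
  intro j
  by_cases hj : j < parent.length
  · exact h j hj
  · rw [List.getD_eq_getElem?_getD, List.getElem?_eq_none (by omega)]
    simp

lemma ufFind_succ (parent : List Nat) (f i : Nat) :
    ufFind parent (f + 1) i
      = if parent.getD i 0 ≠ i then ufFind parent f (parent.getD i 0) else i := rfl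

lemma ufFind_fuel (parent : List Nat) (hp : PtrLe parent) :
    ∀ i f1 f2, i < f1 → i < f2 → ufFind parent f1 i = ufFind parent f2 i := by
  intro i
  induction i using Nat.strong_induction_on with
  | _ i ih =>
    intro f1 f2 h1 h2
    cases f1 with
    | zero => omega
    | succ a =>
      cases f2 with
      | zero => omega
      | succ b =>
        rw [ufFind_succ, ufFind_succ]
        by_cases hroot : parent.getD i 0 = i
        · rw [if_neg (not_not_intro hroot), if_neg (not_not_intro hroot)]
        · have hlt : parent.getD i 0 < i := lt_of_le_of_ne (hp i) hroot
          rw [if_pos hroot, if_pos hroot]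
          exact ih _ hlt a b (by omega) (by omega)

def rootOf (parent : List Nat) (i : Nat) : Nat := ufFind parent (i + 1) i

lemma find_eq_rootOf (parent : List Nat) (hp : PtrLe parent) (i : Nat)
    (hi : i < parent.length) : ufFind parent parent.length i = rootOf parent i :=
  ufFind_fuel parent hp i parent.length (i + 1) hi (by omega)

lemma rootOf_unfold (parent : List Nat) (hp : PtrLe parent) (i : Nat) :
    rootOf parent i = if parent.getD i 0 = i then i
      else rootOf parent (parent.getD i 0) := by
  unfold rootOf
  rw [ufFind_succ]
  by_cases hroot : parent.getD i 0 = i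
  · rw [if_neg (not_not_intro hroot), if_pos hroot]
  · have hlt : parent.getD i 0 < i := lt_of_le_of_ne (hp i) hroot
    rw [if_pos hroot, if_neg hroot]
    exact ufFind_fuel parent hp _ i _ hlt (by omega)

lemma rootOf_spec (parent : List Nat) (hp : PtrLe parent) :
    ∀ i, rootOf parent i ≤ i ∧ parent.getD (rootOf parent i) 0 = rootOf parent i := by
  intro i
  induction i using Nat.strong_induction_on with
  | _ i ih =>
    rw [rootOf_unfold parent hp i]
    by_cases hroot : parent.getD i 0 = i
    · rw [if_pos hroot]
      exact ⟨le_refl i, hroot⟩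
    · have hlt : parent.getD i 0 < i := lt_of_le_of_ne (hp i) hroot
      rw [if_neg hroot]
      obtain ⟨h1, h2⟩ := ih _ hlt
      exact ⟨by omega, h2⟩

lemma rootOf_of_root (parent : List Nat) (hp : PtrLe parent) (i : Nat)
    (h : parent.getD i 0 = i) : rootOf parent i = i := by
  rw [rootOf_unfold parent hp i, if_pos h]

-- union-find invariant tied to grid connectivity
def gcell (land : List (List Int)) (j : Nat) : Int × Int :=
  cellN (j / (land.headI).length) (j % (land.headI).length)

structure UFInv (land : List (List Int)) (parent : List Nat) : Prop where
  len : parent.length = land.length * (land.headI).length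
  ple : PtrLe parent
  sound : ∀ j, j < parent.length → parent.getD j 0 = j ∨
    ConnP land (gcell land j) (gcell land (parent.getD j 0))

lemma rootOf_conn (land : List (List Int)) (parent : List Nat) (h : UFInv land parent) :
    ∀ i, i < parent.length → rootOf parent i = i ∨
      ConnP land (gcell land i) (gcell land (rootOf parent i)) := by
  intro i
  induction i using Nat.strong_induction_on with
  | _ i ih =>
    intro hi
    rw [rootOf_unfold parent h.ple i]
    by_cases hroot : parent.getD i 0 = i
    · rw [if_pos hroot]
      exact Or.inl rfl
    · have hlt : parent.getD i 0 < i := lt_of_le_of_ne (h.ple i) hroot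
      rw [if_neg hroot]
      have hconn : ConnP land (gcell land i) (gcell land (parent.getD i 0)) :=
        (h.sound i hi).resolve_left hroot
      rcases ih _ hlt (by omega) with h' | h'
      · rw [h']
        exact Or.inr hconn
      · exact Or.inr (connP_trans land _ _ _ hconn h')

-- the effect of one union (re-pointing the root hi to the root lo) on every root
lemma rootOf_set (parent : List Nat) (hp : PtrLe parent) (lo hi : Nat)
    (hlohi : lo < hi) (hhi : hi < parent.length)
    (hrhi : parent.getD hi 0 = hi) (hrlo : parent.getD lo 0 = lo) :
    PtrLe (parent.set hi lo) ∧
    ∀ i, rootOf (parent.set hi lo) i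
      = if rootOf parent i = hi then lo else rootOf parent i := by
  have hget : ∀ j, (parent.set hi lo).getD j 0 = if j = hi then lo else parent.getD j 0 :=
    fun j => getD_set_list parent hi j lo 0 hhi
  have hple' : PtrLe (parent.set hi lo) := by
    intro j
    rw [hget j]
    split_ifs with h
    · omega
    · exact hp j
  refine ⟨hple', ?_⟩
  intro i
  induction i using Nat.strong_induction_on with
  | _ i ih =>
    rw [rootOf_unfold _ hple' i, hget i]
    by_cases hih : i = hi
    · subst hih
      rw [if_pos rfl, if_neg (by omega), ih lo hlohi, rootOf_of_root parent hp lo hrlo,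
        if_neg (by omega), rootOf_of_root parent hp i hrhi, if_pos rfl]
    · rw [if_neg hih]
      by_cases hroot : parent.getD i 0 = i
      · rw [if_pos hroot, rootOf_of_root parent hp i hroot, if_neg hih]
      · have hlt : parent.getD i 0 < i := lt_of_le_of_ne (hp i) hroot
        rw [if_neg hroot, ih _ hlt,
          rootOf_unfold parent hp i, if_neg hroot]


lemma lgetI_toNat (m : List (List Int)) (r c : Int) :
    lgetI m r c = (m.getD r.toNat []).getD c.toNat 0 := rfl

lemma lgetI_natCast (m : List (List Int)) (a b : Nat) :
    lgetI m a b = (m.getD a []).getD b 0 := by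
  simp [lgetI]

-- ---- index arithmetic ----
lemma idx_lt (r c rows cols : Nat) (hr : r < rows) (hc : c < cols) :
    r * cols + c < rows * cols := by
  calc r * cols + c < r * cols + cols := by omega
    _ = (r + 1) * cols := by ring
    _ ≤ rows * cols := Nat.mul_le_mul_right cols hr

lemma gcell_encode (land : List (List Int)) (r c : Nat) (hc : c < (land.headI).length) :
    gcell land (r * (land.headI).length + c) = cellN r c := by
  unfold gcell
  have h1 : r * (land.headI).length + c = c + r * (land.headI).length := by ring
  rw [h1, Nat.add_mul_div_right c r (by omega), Nat.div_eq_of_lt hc,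
    Nat.add_mul_mod_self_right, Nat.mod_eq_of_lt hc, Nat.zero_add]

-- ---- one union ----
lemma union_core (land : List (List Int)) (parent : List Nat) (h : UFInv land parent)
    (lo hi : Nat) (hlh : lo < hi) (hhi : hi < parent.length)
    (hrl : parent.getD lo 0 = lo) (hrh : parent.getD hi 0 = hi)
    (hc : ConnP land (gcell land hi) (gcell land lo)) :
    UFInv land (parent.set hi lo) ∧
    ∀ i, rootOf (parent.set hi lo) i
      = if rootOf parent i = hi then lo else rootOf parent i := by
  obtain ⟨hple', hmap⟩ := rootOf_set parent h.ple lo hi hlh hhi hrh hrl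
  refine ⟨⟨by rw [List.length_set]; exact h.len, hple', ?_⟩, hmap⟩
  intro j hj
  rw [List.length_set] at hj
  rw [getD_set_list parent hi j lo 0 hhi]
  split_ifs with hjh
  · subst hjh
    exact Or.inr hc
  · exact h.sound j hj

lemma unionNbr_spec (land : List (List Int)) (r c : Nat) (parent : List Nat)
    (h : UFInv land parent) (hr : r < land.length) (hc : c < (land.headI).length)
    (hl : lgetI land r c = 1) (nbr : Nat × Nat)
    (hadj : Adj (cellN r c) (cellN nbr.1 nbr.2)) :
    UFInv land (unionNbr land land.length (land.headI).length r c parent nbr) ∧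
    (∀ i j, rootOf parent i = rootOf parent j →
      rootOf (unionNbr land land.length (land.headI).length r c parent nbr) i
        = rootOf (unionNbr land land.length (land.headI).length r c parent nbr) j) ∧
    (nbr.1 < land.length → nbr.2 < (land.headI).length → lgetI land nbr.1 nbr.2 = 1 →
      rootOf (unionNbr land land.length (land.headI).length r c parent nbr)
          (r * (land.headI).length + c)
        = rootOf (unionNbr land land.length (land.headI).length r c parent nbr)
          (nbr.1 * (land.headI).length + nbr.2)) := by
  unfold unionNbr
  by_cases hg : nbr.1 < land.length ∧ nbr.2 < (land.headI).length ∧ lgetI land nbr.1 nbr.2 = 1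
  case neg =>
    rw [if_neg hg]
    exact ⟨h, fun i j hij => hij, fun h1 h2 h3 => absurd ⟨h1, h2, h3⟩ hg⟩
  case pos =>
    obtain ⟨hn1, hn2, hn3⟩ := hg
    rw [if_pos ⟨hn1, hn2, hn3⟩]
    have ha : r * (land.headI).length + c < parent.length := by
      rw [h.len]; exact idx_lt r c _ _ hr hc
    have hb : nbr.1 * (land.headI).length + nbr.2 < parent.length := by
      rw [h.len]; exact idx_lt nbr.1 nbr.2 _ _ hn1 hn2
    rw [find_eq_rootOf parent h.ple _ ha, find_eq_rootOf parent h.ple _ hb]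
    set a := r * (land.headI).length + c with hadef
    set b := nbr.1 * (land.headI).length + nbr.2 with hbdef
    set ra := rootOf parent a with hradef
    set rb := rootOf parent b with hrbdef
    have hra := rootOf_spec parent h.ple a
    have hrb := rootOf_spec parent h.ple b
    have hab : ConnP land (gcell land a) (gcell land b) := by
      rw [hadef, hbdef, gcell_encode land r c hc, gcell_encode land nbr.1 nbr.2 hn2]
      exact connP_adj land _ _ ⟨(inGrid_cellN land r c).mpr ⟨hr, hc⟩, hl⟩
        ⟨(inGrid_cellN land nbr.1 nbr.2).mpr ⟨hn1, hn2⟩, hn3⟩ hadj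
    have hconn : ConnP land (gcell land ra) (gcell land rb) := by
      have c1 : ConnP land (gcell land ra) (gcell land b) := by
        rcases rootOf_conn land parent h a ha with he | hc'
        · rw [← hradef] at he; rw [he]; exact hab
        · rw [← hradef] at hc'
          exact connP_trans _ _ _ _ (connP_symm _ _ _ hc') hab
      rcases rootOf_conn land parent h b hb with he | hc'
      · rw [← hrbdef] at he; rw [← he] at c1; exact c1
      · rw [← hrbdef] at hc'
        exact connP_trans _ _ _ _ c1 hc'
    by_cases hne : ra ≠ rb
    case neg =>
      rw [if_neg hne]
      rw [not_not] at hne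
      exact ⟨h, fun i j hij => hij, fun _ _ _ => hne⟩
    case pos =>
      rw [if_pos hne]
      by_cases hlt : ra < rb
      case pos =>
        rw [if_pos hlt]
        obtain ⟨hUF', hmap⟩ := union_core land parent h ra rb hlt
          (by omega) hra.2 hrb.2 (connP_symm _ _ _ hconn)
        refine ⟨hUF', ?_, ?_⟩
        · intro i j hij
          rw [hmap i, hmap j, hij]
        · intro _ _ _
          rw [hmap a, hmap b, ← hradef, ← hrbdef, if_neg hne, if_pos rfl]
      case neg =>
        rw [if_neg hlt]
        have hlt' : rb < ra := by omega
        obtain ⟨hUF', hmap⟩ := union_core land parent h rb ra hlt'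
          (by omega) hrb.2 hra.2 hconn
        refine ⟨hUF', ?_, ?_⟩
        · intro i j hij
          rw [hmap i, hmap j, hij]
        · intro _ _ _
          rw [hmap a, hmap b, ← hradef, ← hrbdef, if_pos rfl,
            if_neg (fun hx => hne hx.symm)]

-- ---- the whole union pass ----
def EdgesDone (land : List (List Int)) (parent : List Nat) (R0 C0 : Nat) : Prop :=
  ∀ r c, r < land.length → c < (land.headI).length → (land.getD r []).getD c 0 = 1 →
    (r < R0 ∨ (r = R0 ∧ c < C0)) →
    ((c + 1 < (land.headI).length → (land.getD r []).getD (c + 1) 0 = 1 →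
        rootOf parent (r * (land.headI).length + c)
          = rootOf parent (r * (land.headI).length + (c + 1)))
     ∧ (r + 1 < land.length → (land.getD (r + 1) []).getD c 0 = 1 →
        rootOf parent (r * (land.headI).length + c)
          = rootOf parent ((r + 1) * (land.headI).length + c)))

lemma union_final (land : List (List Int)) :
    UFInv land ((List.range land.length).foldl (fun parent (r : Nat) =>
      (List.range (land.headI).length).foldl (fun parent (c : Nat) =>
        if lgetI land r c = 1 then
          [(r, c + 1), (r + 1, c)].foldl
            (unionNbr land land.length (land.headI).length r c) parent
        else parent) parent) (List.range (land.length * (land.headI).length)))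
    ∧ EdgesDone land ((List.range land.length).foldl (fun parent (r : Nat) =>
      (List.range (land.headI).length).foldl (fun parent (c : Nat) =>
        if lgetI land r c = 1 then
          [(r, c + 1), (r + 1, c)].foldl
            (unionNbr land land.length (land.headI).length r c) parent
        else parent) parent) (List.range (land.length * (land.headI).length)))
      land.length 0 := by
  have hinit : UFInv land (List.range (land.length * (land.headI).length)) := by
    have hgd : ∀ j, j < (List.range (land.length * (land.headI).length)).length →
        (List.range (land.length * (land.headI).length)).getD j 0 = j := by
      intro j hj
      rw [List.length_range] at hj
      rw [List.getD_eq_getElem?_getD, List.getElem?_range hj]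
      rfl
    refine ⟨by simp, ptrLe_of_lt _ (fun j hj => le_of_eq (hgd j hj)), ?_⟩
    intro j hj
    exact Or.inl (hgd j hj)
  have hadjR : ∀ r c : Nat, Adj (cellN r c) (cellN r (c + 1)) := by
    intro r c
    simp only [Adj, Nbrs, cellN, List.mem_cons, List.not_mem_nil, or_false, Prod.ext_iff]
    left
    exact ⟨trivial, by push_cast; ring⟩
  have hadjD : ∀ r c : Nat, Adj (cellN r c) (cellN (r + 1) c) := by
    intro r c
    simp only [Adj, Nbrs, cellN, List.mem_cons, List.not_mem_nil, or_false, Prod.ext_iff]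
    right; right; left
    exact ⟨by push_cast; ring, trivial⟩
  have hmain := foldl_range_ind (fun parent (r : Nat) =>
      (List.range (land.headI).length).foldl (fun parent (c : Nat) =>
        if lgetI land r c = 1 then
          [(r, c + 1), (r + 1, c)].foldl
            (unionNbr land land.length (land.headI).length r c) parent
        else parent) parent)
    (fun R0 parent => UFInv land parent ∧ EdgesDone land parent R0 0)
    land.length (List.range (land.length * (land.headI).length))
    ⟨hinit, by intro r c _ _ _ hpos; exfalso; omega⟩
    ?_
  · exact hmain
  · intro row parent hrow hP
    have hinner := foldl_range_ind (fun parent (c : Nat) =>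
        if lgetI land row c = 1 then
          [(row, c + 1), (row + 1, c)].foldl
            (unionNbr land land.length (land.headI).length row c) parent
        else parent)
      (fun C0 parent => UFInv land parent ∧ EdgesDone land parent row C0)
      (land.headI).length parent
      ⟨hP.1, by
        intro r c h1 h2 h3 hpos
        refine hP.2 r c h1 h2 h3 ?_
        omega⟩
      ?_
    · refine ⟨hinner.1, ?_⟩
      intro r c h1 h2 h3 hpos
      refine hinner.2 r c h1 h2 h3 ?_
      omega
    · intro col parent' hcol hQ
      beta_reduce
      by_cases hland : lgetI land row col = 1
      case neg =>
        rw [if_neg hland]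
        refine ⟨hQ.1, ?_⟩
        intro r c h1 h2 h3 hpos
        rcases hpos with h | ⟨he1, he2⟩
        · exact hQ.2 r c h1 h2 h3 (Or.inl h)
        · by_cases hcc : c < col
          · exact hQ.2 r c h1 h2 h3 (Or.inr ⟨he1, hcc⟩)
          · have : r = row ∧ c = col := by omega
            rw [this.1, this.2] at h3
            exact absurd (by rw [lgetI_natCast]; exact h3) hland
      case pos =>
        rw [if_pos hland]
        simp only [List.foldl_cons, List.foldl_nil]
        obtain ⟨hUF1, hmono1, hnew1⟩ := unionNbr_spec land row col parent' hQ.1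
          hrow hcol hland (row, col + 1) (hadjR row col)
        obtain ⟨hUF2, hmono2, hnew2⟩ := unionNbr_spec land row col
          (unionNbr land land.length (land.headI).length row col parent' (row, col + 1))
          hUF1 hrow hcol hland (row + 1, col) (hadjD row col)
        refine ⟨hUF2, ?_⟩
        intro r c h1 h2 h3 hpos
        rcases hpos with h | ⟨he1, he2⟩
        · obtain ⟨hE1, hE2⟩ := hQ.2 r c h1 h2 h3 (Or.inl h)
          exact ⟨fun hx hy => hmono2 _ _ (hmono1 _ _ (hE1 hx hy)),
            fun hx hy => hmono2 _ _ (hmono1 _ _ (hE2 hx hy))⟩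
        · by_cases hcc : c < col
          · obtain ⟨hE1, hE2⟩ := hQ.2 r c h1 h2 h3 (Or.inr ⟨he1, hcc⟩)
            exact ⟨fun hx hy => hmono2 _ _ (hmono1 _ _ (hE1 hx hy)),
              fun hx hy => hmono2 _ _ (hmono1 _ _ (hE2 hx hy))⟩
          · have hrc : r = row ∧ c = col := by omega
            obtain ⟨hr1, hr2⟩ := hrc
            subst hr1; subst hr2
            constructor
            · intro hx hy
              exact hmono2 _ _ (hnew1 (by omega) (by simpa using hx)
                (by rw [lgetI_natCast]; exact hy))
            · intro hx hy
              exact hnew2 (by simpa using hx) (by omega)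
                (by rw [lgetI_natCast]; exact hy)


def idxP (land : List (List Int)) (p : Int × Int) : Nat :=
  p.1.toNat * (land.headI).length + p.2.toNat

lemma edge_root_eq (land : List (List Int)) (P : List Nat)
    (hE : EdgesDone land P land.length 0) :
    ∀ x q, FreeP land x → FreeP land q → Adj x q →
      rootOf P (idxP land x) = rootOf P (idxP land q) := by
  intro x q hfx hfq hadj
  obtain ⟨⟨hx1, hx2, hx3, hx4⟩, hlx⟩ := hfx
  obtain ⟨⟨hq1, hq2, hq3, hq4⟩, hlq⟩ := hfq
  have hlx' : (land.getD x.1.toNat []).getD x.2.toNat 0 = 1 := by rw [← lgetI_toNat]; exact hlx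
  have hlq' : (land.getD q.1.toNat []).getD q.2.toNat 0 = 1 := by rw [← lgetI_toNat]; exact hlq
  simp only [Adj, Nbrs, List.mem_cons, List.not_mem_nil, or_false, Prod.ext_iff] at hadj
  unfold idxP
  rcases hadj with ⟨h1, h2⟩ | ⟨h1, h2⟩ | ⟨h1, h2⟩ | ⟨h1, h2⟩
  · -- q = (x.1, x.2 + 1)
    have e1 : q.1.toNat = x.1.toNat := by omega
    have e2 : q.2.toNat = x.2.toNat + 1 := by omega
    rw [e1, e2] at hlq'
    have h := (hE x.1.toNat x.2.toNat (by omega) (by omega) hlx' (by omega)).1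
      (by omega) hlq'
    rw [e1, e2]
    exact h
  · -- q = (x.1, x.2 - 1): x is the right neighbour of q
    have e1 : x.1.toNat = q.1.toNat := by omega
    have e2 : x.2.toNat = q.2.toNat + 1 := by omega
    rw [e1, e2] at hlx'
    have h := (hE q.1.toNat q.2.toNat (by omega) (by omega) hlq' (by omega)).1
      (by omega) hlx'
    rw [e1, e2]
    exact h.symm
  · -- q = (x.1 + 1, x.2)
    have e1 : q.1.toNat = x.1.toNat + 1 := by omega
    have e2 : q.2.toNat = x.2.toNat := by omega
    rw [e1, e2] at hlq'
    have h := (hE x.1.toNat x.2.toNat (by omega) (by omega) hlx' (by omega)).2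
      (by omega) hlq'
    rw [e1, e2]
    exact h
  · -- q = (x.1 - 1, x.2): x is the down neighbour of q
    have e1 : x.1.toNat = q.1.toNat + 1 := by omega
    have e2 : x.2.toNat = q.2.toNat := by omega
    rw [e1, e2] at hlx'
    have h := (hE q.1.toNat q.2.toNat (by omega) (by omega) hlq' (by omega)).2
      (by omega) hlx'
    rw [e1, e2]
    exact h.symm

lemma conn_to_rootEq (land : List (List Int)) (P : List Nat)
    (hE : EdgesDone land P land.length 0) :
    ∀ p q, ConnP land p q → rootOf P (idxP land p) = rootOf P (idxP land q) := by
  intro p q hconn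
  obtain ⟨hfp, hfq2, hr⟩ := hconn
  clear hfq2
  induction hr with
  | base => rfl
  | @step x y hx hadj hfy ih =>
    have hfx : FreeP land x := (freeC_zmat _ _).mp
      (reach_freeC _ _ _ _ ((freeC_zmat _ _).mpr hfp) hx)
    exact Eq.trans ih (edge_root_eq land P hE x y hfx ((freeC_zmat _ _).mp hfy) hadj)

lemma cell_eta (land : List (List Int)) (p : Int × Int) (hp : InGrid land p) :
    cellN p.1.toNat p.2.toNat = p := by
  obtain ⟨h1, _, h3, _⟩ := hp
  exact Prod.ext (by simp only [cellN]; omega) (by simp only [cellN]; omega)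

lemma gcell_idxP (land : List (List Int)) (p : Int × Int) (hp : InGrid land p) :
    gcell land (idxP land p) = p := by
  unfold idxP
  rw [gcell_encode land p.1.toNat p.2.toNat
    (by have h1 := hp.2.2.1; have h2 := hp.2.2.2; omega)]
  exact cell_eta land p hp

lemma idxP_lt (land : List (List Int)) (P : List Nat) (hUF : UFInv land P)
    (p : Int × Int) (hp : InGrid land p) : idxP land p < P.length := by
  rw [hUF.len]
  exact idx_lt _ _ _ _ (by have h1 := hp.1; have h2 := hp.2.1; omega)
    (by have h1 := hp.2.2.1; have h2 := hp.2.2.2; omega)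

lemma rootEq_to_conn (land : List (List Int)) (P : List Nat) (hUF : UFInv land P) :
    ∀ p q, FreeP land p → FreeP land q →
      rootOf P (idxP land p) = rootOf P (idxP land q) → ConnP land p q := by
  intro p q hfp hfq hreq
  have hp := idxP_lt land P hUF p hfp.1
  have hq := idxP_lt land P hUF q hfq.1
  have h1 := rootOf_conn land P hUF (idxP land p) hp
  have h2 := rootOf_conn land P hUF (idxP land q) hq
  rw [gcell_idxP land p hfp.1] at h1
  rw [gcell_idxP land q hfq.1] at h2
  have c1 : ConnP land p (gcell land (rootOf P (idxP land p))) := by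
    rcases h1 with h1 | h1
    · rw [h1, gcell_idxP land p hfp.1]
      exact ⟨hfp, hfp, Reach.base⟩
    · exact h1
  have c2 : ConnP land q (gcell land (rootOf P (idxP land q))) := by
    rcases h2 with h2 | h2
    · rw [h2, gcell_idxP land q hfq.1]
      exact ⟨hfq, hfq, Reach.base⟩
    · exact h2
  rw [hreq] at c1
  exact connP_trans land _ _ _ c1 (connP_symm land _ _ c2)


-- ---- B's size pass: a counter over the free cells' roots ----
lemma foldl_ite {α β σ : Type} (q : α → Prop) [DecidablePred q] (k : α → β) (g : σ → β → σ) :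
    ∀ (L : List α) (st : σ),
      L.foldl (fun st a => if q a then g st (k a) else st) st
        = ((L.filter (fun a => decide (q a))).map k).foldl g st := by
  intro L
  induction L with
  | nil => intro st; rfl
  | cons a L ih =>
    intro st
    by_cases hq : q a
    · rw [List.foldl_cons, if_pos hq, List.filter_cons_of_pos (by simpa using hq),
        List.map_cons, List.foldl_cons, ih]
    · rw [List.foldl_cons, if_neg hq, List.filter_cons_of_neg (by simpa using hq), ih]

def cellsF (land : List (List Int)) : List (Nat × Nat) :=
  (List.range land.length).flatMap (fun (r : Nat) =>
    ((List.range (land.headI).length).filter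
      (fun (c : Nat) => decide (lgetI land r c = 1))).map (fun (c : Nat) => (r, c)))

lemma mem_cellsF (land : List (List Int)) (rc : Nat × Nat) :
    rc ∈ cellsF land ↔ rc.1 < land.length ∧ rc.2 < (land.headI).length ∧
      lgetI land rc.1 rc.2 = 1 := by
  simp only [cellsF, List.mem_flatMap, List.mem_map, List.mem_filter, List.mem_range]
  constructor
  · rintro ⟨r, hr, c, ⟨hc, hl⟩, rfl⟩
    exact ⟨hr, hc, by simpa using hl⟩
  · rintro ⟨h1, h2, h3⟩
    exact ⟨rc.1, h1, rc.2, ⟨h2, by simpa using h3⟩, rfl⟩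

lemma nodup_cellsF (land : List (List Int)) : (cellsF land).Nodup := by
  rw [cellsF, List.nodup_flatMap]
  constructor
  · intro r _
    refine ((List.nodup_range).filter _).map ?_
    intro a b h
    simpa [Prod.ext_iff] using h
  · refine List.Pairwise.imp ?_ (List.nodup_range (n := land.length))
    intro a b hab x hx hx'
    simp only [List.mem_map, List.mem_filter] at hx hx'
    obtain ⟨c, _, rfl⟩ := hx
    obtain ⟨c', _, h⟩ := hx'
    have h2 : a = b ∧ c = c' := by simpa [Prod.ext_iff] using h.symm
    exact hab h2.1

lemma size_getD (land : List (List Int)) (P : List Nat) (v : Nat) :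
    ((List.range land.length).foldl (fun d (r : Nat) =>
      (List.range (land.headI).length).foldl (fun (d : PySem.Dict Nat Int) (c : Nat) =>
        if lgetI land r c = 1 then
          d.insert (ufFind P P.length (r * (land.headI).length + c))
            (d.getD (ufFind P P.length (r * (land.headI).length + c)) 0 + 1)
        else d) d) (PySem.Dict.empty : PySem.Dict Nat Int)).getD v 0
    = ((cellsF land).map (fun rc : Nat × Nat =>
        ufFind P P.length (rc.1 * (land.headI).length + rc.2))).count v := by
  have hstep : ∀ (d : PySem.Dict Nat Int) (r : Nat),
      (List.range (land.headI).length).foldl (fun (d : PySem.Dict Nat Int) (c : Nat) =>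
        if lgetI land r c = 1 then
          d.insert (ufFind P P.length (r * (land.headI).length + c))
            (d.getD (ufFind P P.length (r * (land.headI).length + c)) 0 + 1)
        else d) d
      = ((((List.range (land.headI).length).filter
            (fun (c : Nat) => decide (lgetI land r c = 1))).map
          (fun (c : Nat) => ufFind P P.length (r * (land.headI).length + c))).foldl
          (fun (d : PySem.Dict Nat Int) x => d.insert x (d.getD x 0 + 1)) d) := by
    intro d r
    exact foldl_ite (fun c : Nat => lgetI land r c = 1)
      (fun (c : Nat) => ufFind P P.length (r * (land.headI).length + c))
      (fun (d : PySem.Dict Nat Int) x => d.insert x (d.getD x 0 + 1)) _ d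
  calc ((List.range land.length).foldl (fun d (r : Nat) =>
      (List.range (land.headI).length).foldl (fun (d : PySem.Dict Nat Int) (c : Nat) =>
        if lgetI land r c = 1 then
          d.insert (ufFind P P.length (r * (land.headI).length + c))
            (d.getD (ufFind P P.length (r * (land.headI).length + c)) 0 + 1)
        else d) d) (PySem.Dict.empty : PySem.Dict Nat Int)).getD v 0
      = (((cellsF land).map (fun rc : Nat × Nat =>
          ufFind P P.length (rc.1 * (land.headI).length + rc.2))).foldl
          (fun (d : PySem.Dict Nat Int) x => d.insert x (d.getD x 0 + 1))
          (PySem.Dict.empty : PySem.Dict Nat Int)).getD v 0 := by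
        congr 1
        rw [show (cellsF land).map (fun rc : Nat × Nat =>
            ufFind P P.length (rc.1 * (land.headI).length + rc.2))
          = (List.range land.length).flatMap (fun (r : Nat) =>
              (((List.range (land.headI).length).filter
                (fun (c : Nat) => decide (lgetI land r c = 1))).map
                (fun (c : Nat) => ufFind P P.length (r * (land.headI).length + c)))) from by
            rw [cellsF, List.map_flatMap]
            congr 1
            funext r
            rw [List.map_map]
            rfl]
        rw [List.foldl_flatMap]
        exact (foldl_rel (fun _ => True) _ _ _ _ trivial
          (fun d r hr _ => ⟨hstep d r, trivial⟩)).1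
      _ = _ := by
        rw [PySem.Dict.getD_foldl_insert_add_one]
        simp [PySem.Dict.getD_empty]


lemma idxP_cellN (land : List (List Int)) (r c : Nat) :
    idxP land (cellN r c) = r * (land.headI).length + c := by
  simp [idxP, cellN]

lemma count_card (land : List (List Int)) (P : List Nat) (hUF : UFInv land P)
    (hE : EdgesDone land P land.length 0) (x : Int × Int) (hfx : FreeP land x)
    (S : Finset (Int × Int)) (hS : ∀ q, q ∈ S ↔ Reach land (zmat land) x q) :
    ((cellsF land).map (fun rc : Nat × Nat =>
        ufFind P P.length (rc.1 * (land.headI).length + rc.2))).count (rootOf P (idxP land x))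
      = S.card := by
  rw [List.count_eq_countP, List.countP_map, List.countP_eq_length_filter]
  simp only [Function.comp_def]
  rw [← List.toFinset_card_of_nodup ((nodup_cellsF land).filter _)]
  have hkey : ∀ rc : Nat × Nat, rc.1 < land.length → rc.2 < (land.headI).length →
      ufFind P P.length (rc.1 * (land.headI).length + rc.2)
        = rootOf P (idxP land (cellN rc.1 rc.2)) := by
    intro rc h1 h2
    rw [idxP_cellN]
    exact find_eq_rootOf P hUF.ple _ (by rw [hUF.len]; exact idx_lt _ _ _ _ h1 h2)
  have hmem : ∀ rc : Nat × Nat,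
      rc ∈ ((cellsF land).filter
        (fun rc : Nat × Nat => ufFind P P.length (rc.1 * (land.headI).length + rc.2)
          == rootOf P (idxP land x))).toFinset
      ↔ (rc.1 < land.length ∧ rc.2 < (land.headI).length ∧ lgetI land rc.1 rc.2 = 1)
        ∧ rootOf P (idxP land (cellN rc.1 rc.2)) = rootOf P (idxP land x) := by
    intro rc
    rw [List.mem_toFinset, List.mem_filter, mem_cellsF]
    constructor
    · rintro ⟨h1, h2⟩
      refine ⟨h1, ?_⟩
      rw [← hkey rc h1.1 h1.2.1]
      exact beq_iff_eq.mp h2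
    · rintro ⟨h1, h2⟩
      refine ⟨h1, beq_iff_eq.mpr ?_⟩
      rw [hkey rc h1.1 h1.2.1]
      exact h2
  refine Finset.card_bij (fun rc _ => cellN rc.1 rc.2) ?_ ?_ ?_
  · intro rc hrc
    rw [hmem rc] at hrc
    obtain ⟨⟨h1, h2, h3⟩, h4⟩ := hrc
    have hfc : FreeP land (cellN rc.1 rc.2) := ⟨(inGrid_cellN land rc.1 rc.2).mpr ⟨h1, h2⟩, h3⟩
    rw [hS]
    exact (connP_symm land _ _ (rootEq_to_conn land P hUF _ x hfc hfx h4)).2.2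
  · intro a _ b _ hab
    simp only [cellN, Prod.ext_iff] at hab
    exact Prod.ext (by exact_mod_cast hab.1) (by exact_mod_cast hab.2)
  · intro q hq
    rw [hS] at hq
    have hfq : FreeP land q := (freeC_zmat _ _).mp
      (reach_freeC _ _ _ _ ((freeC_zmat _ _).mpr hfx) hq)
    refine ⟨(q.1.toNat, q.2.toNat), ?_, cell_eta land q hfq.1⟩
    rw [hmem _]
    have hg := hfq.1
    refine ⟨⟨by have := hg.1; have := hg.2.1; omega,
      by have := hg.2.2.1; have := hg.2.2.2; omega, ?_⟩, ?_⟩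
    · show lgetI land ((q.1.toNat : Nat) : Int) ((q.2.toNat : Nat) : Int) = 1
      rw [lgetI_natCast, ← lgetI_toNat]
      exact hfq.2
    · rw [show cellN (q.1.toNat, q.2.toNat).1 (q.1.toNat, q.2.toNat).2 = q from cell_eta land q hfq.1]
      exact (conn_to_rootEq land P hE q x (connP_symm land _ _ ⟨hfx, hfq, hq⟩))

lemma sigma_match (land : List (List Int)) (st : List (List Int) × PySem.Dict Int Int × Int)
    (hInv : Inv1 land st) (P : List Nat) (hUF : UFInv land P)
    (hE : EdgesDone land P land.length 0) (x : Int × Int) (hg : InGrid land x)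
    (hlab : lgetI st.1 x.1 x.2 ≠ 0) :
    st.2.1.getD (lgetI st.1 x.1 x.2) 0
      = (((cellsF land).map (fun rc : Nat × Nat =>
          ufFind P P.length (rc.1 * (land.headI).length + rc.2))).count
            (rootOf P (idxP land x)) : Int) := by
  obtain ⟨S, hS, hD⟩ := hInv.dict x hg hlab
  rw [hD, count_card land P hUF hE x (hInv.lfree x hg hlab) S
    (fun q => hS q)]

-- ---- first-occurrence sums: both columns reduce to the same recursion ----
def dsum {β : Type} [DecidableEq β] (f : Nat → Option β) (g : β → Int) :
    List Nat → List β → Int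
  | [], _ => 0
  | r :: L, seen =>
    match f r with
    | none => dsum f g L seen
    | some b => if b ∈ seen then dsum f g L seen else g b + dsum f g L (b :: seen)

lemma dsum_cons_none {β : Type} [DecidableEq β] (f : Nat → Option β) (g : β → Int)
    (r : Nat) (L : List Nat) (seen : List β) (hf : f r = none) :
    dsum f g (r :: L) seen = dsum f g L seen := by
  simp [dsum, hf]

lemma dsum_cons_some {β : Type} [DecidableEq β] (f : Nat → Option β) (g : β → Int)
    (r : Nat) (L : List Nat) (seen : List β) (b : β) (hf : f r = some b) :
    dsum f g (r :: L) seen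
      = if b ∈ seen then dsum f g L seen else g b + dsum f g L (b :: seen) := by
  simp [dsum, hf]

lemma dsum_congr_seen {β : Type} [DecidableEq β] (f : Nat → Option β) (g : β → Int) :
    ∀ (L : List Nat) (s1 s2 : List β), (∀ b, b ∈ s1 ↔ b ∈ s2) →
      dsum f g L s1 = dsum f g L s2 := by
  intro L
  induction L with
  | nil => intro _ _ _; rfl
  | cons r L ih =>
    intro s1 s2 h
    cases hf : f r with
    | none => rw [dsum_cons_none f g r L s1 hf, dsum_cons_none f g r L s2 hf]; exact ih s1 s2 h
    | some b =>
      rw [dsum_cons_some f g r L s1 b hf, dsum_cons_some f g r L s2 b hf]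
      by_cases hb : b ∈ s1
      · rw [if_pos hb, if_pos ((h b).mp hb)]
        exact ih s1 s2 h
      · rw [if_neg hb, if_neg (fun hx => hb ((h b).mpr hx))]
        rw [ih (b :: s1) (b :: s2) (by intro x; simp [h x])]

lemma afold_dsum (M : List (List Int)) (D : PySem.Dict Int Int) (c : Nat) :
    ∀ (L : List Nat) (s : Int) (st : PySem.Set Int) (seen : List Int),
      (∀ b, b ∈ st ↔ b ∈ seen) →
      (L.foldl (fun (p : Int × PySem.Set Int) (row : Nat) =>
        if lgetI M row c ≠ 0 ∧ ¬ (PySem.Set.contains p.2 (lgetI M row c) = true) then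
          (p.1 + PySem.Dict.getD D (lgetI M row c) 0, PySem.Set.add p.2 (lgetI M row c))
        else p) (s, st)).1
      = s + dsum (fun row => if lgetI M row c = 0 then none else some (lgetI M row c))
          (fun v => PySem.Dict.getD D v 0) L seen := by
  intro L
  induction L with
  | nil => intro s st seen _; simp [dsum]
  | cons row L ih =>
    intro s st seen hiff
    rw [List.foldl_cons]
    by_cases hv : lgetI M row c = 0
    · rw [dsum_cons_none _ _ _ _ _ (by rw [if_pos hv])]
      rw [if_neg (by intro hcon; exact hcon.1 hv)]
      exact ih s st seen hiff
    · rw [dsum_cons_some _ _ _ _ _ _ (by rw [if_neg hv])]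
      by_cases hmem : lgetI M row c ∈ seen
      · rw [if_pos hmem]
        rw [if_neg (by
          intro hcon
          exact hcon.2 ((PySem.Set.contains_iff _ _).mpr ((hiff _).mpr hmem)))]
        exact ih s st seen hiff
      · rw [if_neg hmem]
        rw [if_pos ⟨hv, by
          intro hcon
          exact hmem ((hiff _).mp ((PySem.Set.contains_iff _ _).mp hcon))⟩]
        rw [ih (s + PySem.Dict.getD D (lgetI M row c) 0)
          (PySem.Set.add st (lgetI M row c)) (lgetI M row c :: seen)
          (by
            intro b
            rw [PySem.Set.mem_add, List.mem_cons, hiff b]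
            tauto)]
        ring

lemma setfold_dsum (g : Nat → Int) :
    ∀ (M : List Nat) (acc : PySem.Set Nat) (s0 : Int),
      ((M.foldl PySem.Set.add acc).foldl (fun s x => s + g x) s0)
        = acc.foldl (fun s x => s + g x) s0
          + dsum (fun i => some i) g M acc := by
  intro M
  induction M with
  | nil => intro acc s0; simp [dsum]
  | cons b M ih =>
    intro acc s0
    rw [List.foldl_cons, dsum_cons_some _ _ _ _ _ b rfl]
    by_cases hb : b ∈ acc
    · rw [PySem.Set.add_of_mem hb, if_pos hb, ih acc s0]
    · rw [PySem.Set.add_of_not_mem hb, if_neg hb, ih (acc ++ [b]) s0]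
      rw [List.foldl_append]
      simp only [List.foldl_cons, List.foldl_nil]
      rw [dsum_congr_seen (fun i => some i) g M (acc ++ [b]) (b :: acc)
        (by intro x; simp [or_comm])]
      ring

lemma ofList_fold (g : Nat → Int) (M : List Nat) :
    (PySem.Set.ofList M).foldl (fun s x => s + g x) 0
      = dsum (fun i => some i) g M [] := by
  rw [PySem.Set.ofList_eq_foldl, setfold_dsum g M [] 0]
  simp

lemma dsum_map_filter (q : Nat → Prop) [DecidablePred q] (k : Nat → Nat) (g : Nat → Int) :
    ∀ (L : List Nat) (seen : List Nat),
      dsum (fun i => some i) g ((L.filter (fun a => decide (q a))).map k) seen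
        = dsum (fun a => if q a then some (k a) else none) g L seen := by
  intro L
  induction L with
  | nil => intro seen; rfl
  | cons a L ih =>
    intro seen
    by_cases hq : q a
    · rw [List.filter_cons_of_pos (by simpa using hq), List.map_cons,
        dsum_cons_some _ _ _ _ _ (k a) rfl,
        dsum_cons_some _ _ _ _ _ (k a) (by rw [if_pos hq])]
      by_cases hm : k a ∈ seen
      · rw [if_pos hm, if_pos hm, ih seen]
      · rw [if_neg hm, if_neg hm, ih (k a :: seen)]
    · rw [List.filter_cons_of_neg (by simpa using hq),
        dsum_cons_none _ _ _ _ _ (by rw [if_neg hq]), ih seen]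

lemma dsum_cross {β1 β2 : Type} [DecidableEq β1] [DecidableEq β2]
    (f1 : Nat → Option β1) (f2 : Nat → Option β2) (g1 : β1 → Int) (g2 : β2 → Int)
    (hsome : ∀ r, (f1 r).isSome ↔ (f2 r).isSome)
    (heq : ∀ r r' a a' b b', f1 r = some a → f1 r' = some a' →
      f2 r = some b → f2 r' = some b' → (a = a' ↔ b = b'))
    (hg : ∀ r a b, f1 r = some a → f2 r = some b → g1 a = g2 b) :
    ∀ (L : List Nat) (W : List Nat),
      dsum f1 g1 L (W.filterMap f1) = dsum f2 g2 L (W.filterMap f2) := by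
  intro L
  induction L with
  | nil => intro W; rfl
  | cons r L ih =>
    intro W
    cases hf1 : f1 r with
    | none =>
      have hf2 : f2 r = none := by
        have := hsome r
        rw [hf1] at this
        simp only [Option.isSome_none, Bool.false_eq_true, false_iff] at this
        exact Option.not_isSome_iff_eq_none.mp this
      rw [dsum_cons_none _ _ _ _ _ hf1, dsum_cons_none _ _ _ _ _ hf2]
      exact ih W
    | some a =>
      have hf2s : (f2 r).isSome := by
        rw [← hsome r, hf1]; rfl
      obtain ⟨b, hf2⟩ := Option.isSome_iff_exists.mp hf2s
      rw [dsum_cons_some _ _ _ _ _ a hf1, dsum_cons_some _ _ _ _ _ b hf2]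
      have hmem : a ∈ W.filterMap f1 ↔ b ∈ W.filterMap f2 := by
        rw [List.mem_filterMap, List.mem_filterMap]
        constructor
        · rintro ⟨w, hw, hfw⟩
          have hws : (f2 w).isSome := by rw [← hsome w, hfw]; rfl
          obtain ⟨bw, hfw2⟩ := Option.isSome_iff_exists.mp hws
          exact ⟨w, hw, by rw [hfw2, (heq w r a a bw b hfw hf1 hfw2 hf2).mp rfl]⟩
        · rintro ⟨w, hw, hfw⟩
          have hws : (f1 w).isSome := by rw [hsome w, hfw]; rfl
          obtain ⟨aw, hfw1⟩ := Option.isSome_iff_exists.mp hws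
          exact ⟨w, hw, by rw [hfw1, (heq w r aw a b b hfw1 hf1 hfw hf2).mpr rfl]⟩
      by_cases hm : a ∈ W.filterMap f1
      · rw [if_pos hm, if_pos (hmem.mp hm)]
        exact ih W
      · rw [if_neg hm, if_neg (fun hx => hm (hmem.mpr hx))]
        have ih' := ih (r :: W)
        rw [List.filterMap_cons_some hf1, List.filterMap_cons_some hf2] at ih'
        rw [ih', hg r a b hf1 hf2]


lemma lgetI_ge (m : List (List Int)) (r c : Nat) (h : m.length ≤ r) :
    lgetI m r c = 0 := by
  rw [lgetI_natCast,
    show m.getD r [] = [] from by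
      rw [List.getD_eq_getElem?_getD, List.getElem?_eq_none (by omega)]; rfl,
    show (List.nil (α := Int)).getD c 0 = 0 from rfl]

-- one column: A's visited-id accumulation equals B's sum over the distinct roots
lemma col_eq (land : List (List Int)) (stF : List (List Int) × PySem.Dict Int Int × Int)
    (P : List Nat) (hInv : Inv1 land stF)
    (hAll : ∀ p, FreeP land p → lgetI stF.1 p.1 p.2 ≠ 0)
    (hUF : UFInv land P) (hE : EdgesDone land P land.length 0)
    (c : Nat) (hc : c < (land.headI).length) :
    ((List.range land.length).foldl (fun (p : Int × PySem.Set Int) (row : Nat) =>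
      if lgetI stF.1 row c ≠ 0 ∧ ¬ (PySem.Set.contains p.2 (lgetI stF.1 row c) = true) then
        (p.1 + PySem.Dict.getD stF.2.1 (lgetI stF.1 row c) 0,
          PySem.Set.add p.2 (lgetI stF.1 row c))
      else p) ((0 : Int), (PySem.Set.empty : PySem.Set Int))).1
    = (PySem.Set.ofList (((List.range land.length).filter
          (fun (r : Nat) => decide (lgetI land r c = 1))).map
          (fun (r : Nat) => ufFind P P.length (r * (land.headI).length + c)))).foldl
        (fun s x => s + PySem.Dict.getD ((List.range land.length).foldl (fun d (r : Nat) =>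
          (List.range (land.headI).length).foldl (fun (d : PySem.Dict Nat Int) (c' : Nat) =>
            if lgetI land r c' = 1 then
              d.insert (ufFind P P.length (r * (land.headI).length + c'))
                (d.getD (ufFind P P.length (r * (land.headI).length + c')) 0 + 1)
            else d) d) (PySem.Dict.empty : PySem.Dict Nat Int)) x 0) 0 := by
  have hsize : (fun (s : Int) (x : Nat) =>
      s + PySem.Dict.getD ((List.range land.length).foldl (fun d (r : Nat) =>
        (List.range (land.headI).length).foldl (fun (d : PySem.Dict Nat Int) (c' : Nat) =>
          if lgetI land r c' = 1 then
            d.insert (ufFind P P.length (r * (land.headI).length + c'))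
              (d.getD (ufFind P P.length (r * (land.headI).length + c')) 0 + 1)
          else d) d) (PySem.Dict.empty : PySem.Dict Nat Int)) x 0)
      = (fun (s : Int) (x : Nat) => s + (((cellsF land).map (fun rc : Nat × Nat =>
          ufFind P P.length (rc.1 * (land.headI).length + rc.2))).count x : Int)) := by
    funext s x
    rw [size_getD land P x]
  rw [hsize]
  -- the helper facts tying labels, land and roots together
  have label_iff : ∀ r : Nat, lgetI stF.1 r c ≠ 0 ↔ lgetI land r c = 1 := by
    intro r
    by_cases hr : r < land.length
    · constructor
      · intro h
        exact (hInv.lfree (cellN r c) ((inGrid_cellN land r c).mpr ⟨hr, hc⟩) h).2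
      · intro h
        exact hAll (cellN r c) ⟨(inGrid_cellN land r c).mpr ⟨hr, hc⟩, h⟩
    · rw [lgetI_ge stF.1 r c (by rw [hInv.dims.1]; omega), lgetI_ge land r c (by omega)]
      simp
  have hrlt : ∀ r : Nat, lgetI land r c = 1 → r < land.length := by
    intro r h
    by_contra hge
    rw [lgetI_ge land r c (by omega)] at h
    exact absurd h (by norm_num)
  have hfind : ∀ r : Nat, r < land.length →
      ufFind P P.length (r * (land.headI).length + c)
        = rootOf P (idxP land (cellN r c)) := by
    intro r hr
    rw [idxP_cellN]
    exact find_eq_rootOf P hUF.ple _ (by rw [hUF.len]; exact idx_lt _ _ _ _ hr hc)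
  -- reduce both sides to dsum over the rows
  rw [afold_dsum stF.1 stF.2.1 c (List.range land.length) 0
    (PySem.Set.empty : PySem.Set Int) [] (by intro b; simp [PySem.Set.empty])]
  rw [ofList_fold, dsum_map_filter (fun (r : Nat) => lgetI land r c = 1)
    (fun (r : Nat) => ufFind P P.length (r * (land.headI).length + c))]
  rw [zero_add]
  have hcross := dsum_cross
    (fun row => if lgetI stF.1 row c = 0 then none else some (lgetI stF.1 row c))
    (fun r => if lgetI land r c = 1
      then some (ufFind P P.length (r * (land.headI).length + c)) else none)
    (fun v => PySem.Dict.getD stF.2.1 v 0)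
    (fun x => (((cellsF land).map (fun rc : Nat × Nat =>
      ufFind P P.length (rc.1 * (land.headI).length + rc.2))).count x : Int))
    ?_ ?_ ?_ (List.range land.length) []
  · exact hcross
  · -- hsome
    intro r
    by_cases h1 : lgetI stF.1 r c = 0
    · have h2 : ¬ lgetI land r c = 1 := fun hx => ((label_iff r).mpr hx) h1
      simp [h1, h2]
    · have h2 : lgetI land r c = 1 := (label_iff r).mp h1
      simp [h1, h2]
  · -- heq
    intro r r' a a' b b' hfa hfa' hfb hfb'
    beta_reduce at hfa hfa' hfb hfb'
    by_cases h1 : lgetI stF.1 r c = 0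
    · rw [if_pos h1] at hfa; exact absurd hfa (by simp)
    by_cases h1' : lgetI stF.1 r' c = 0
    · rw [if_pos h1'] at hfa'; exact absurd hfa' (by simp)
    rw [if_neg h1] at hfa
    rw [if_neg h1'] at hfa'
    have hl : lgetI land r c = 1 := (label_iff r).mp h1
    have hl' : lgetI land r' c = 1 := (label_iff r').mp h1'
    rw [if_pos hl] at hfb
    rw [if_pos hl'] at hfb'
    have hr := hrlt r hl
    have hr' := hrlt r' hl'
    obtain rfl : a = lgetI stF.1 r c := (Option.some.inj hfa).symm
    obtain rfl : a' = lgetI stF.1 r' c := (Option.some.inj hfa').symm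
    obtain rfl : b = ufFind P P.length (r * (land.headI).length + c) :=
      (Option.some.inj hfb).symm
    obtain rfl : b' = ufFind P P.length (r' * (land.headI).length + c) :=
      (Option.some.inj hfb').symm
    have hgr : InGrid land (cellN r c) := (inGrid_cellN land r c).mpr ⟨hr, hc⟩
    have hgr' : InGrid land (cellN r' c) := (inGrid_cellN land r' c).mpr ⟨hr', hc⟩
    rw [hfind r hr, hfind r' hr']
    constructor
    · intro hlab
      have hreach := hInv.inj (cellN r c) (cellN r' c) hgr hgr' h1 hlab
      exact conn_to_rootEq land P hE _ _
        ⟨hInv.lfree _ hgr h1, hInv.lfree _ hgr' h1', hreach⟩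
    · intro hroot
      have hconn := rootEq_to_conn land P hUF _ _
        (hInv.lfree _ hgr h1) (hInv.lfree _ hgr' h1') hroot
      exact (hInv.closed (cellN r c) (cellN r' c) hgr h1 hconn.2.2).symm
  · -- hg
    intro r a b hfa hfb
    beta_reduce at hfa hfb
    by_cases h1 : lgetI stF.1 r c = 0
    · rw [if_pos h1] at hfa; exact absurd hfa (by simp)
    rw [if_neg h1] at hfa
    have hl : lgetI land r c = 1 := (label_iff r).mp h1
    rw [if_pos hl] at hfb
    have hr := hrlt r hl
    obtain rfl : a = lgetI stF.1 r c := (Option.some.inj hfa).symm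
    obtain rfl : b = ufFind P P.length (r * (land.headI).length + c) :=
      (Option.some.inj hfb).symm
    rw [hfind r hr]
    exact sigma_match land stF hInv P hUF hE (cellN r c)
      ((inGrid_cellN land r c).mpr ⟨hr, hc⟩) h1

-- the two phase-2 column scans agree, for any state/forest with the established properties
lemma cols_eq_gen (land : List (List Int))
    (stF : List (List Int) × PySem.Dict Int Int × Int) (P : List Nat)
    (hInv : Inv1 land stF)
    (hAll : ∀ p, FreeP land p → lgetI stF.1 p.1 p.2 ≠ 0)
    (hUF : UFInv land P) (hE : EdgesDone land P land.length 0) :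
    (List.range (land.headI).length).foldl (fun answer (col : Nat) =>
      max answer (((List.range land.length).foldl (fun (p : Int × PySem.Set Int) (row : Nat) =>
        if lgetI stF.1 row col ≠ 0 ∧ ¬ (PySem.Set.contains p.2 (lgetI stF.1 row col) = true) then
          (p.1 + PySem.Dict.getD stF.2.1 (lgetI stF.1 row col) 0,
            PySem.Set.add p.2 (lgetI stF.1 row col))
        else p) ((0 : Int), (PySem.Set.empty : PySem.Set Int))).1)) 0
    = (List.range (land.headI).length).foldl (fun best (col : Nat) =>
      max best ((PySem.Set.ofList (((List.range land.length).filter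
          (fun (r : Nat) => decide (lgetI land r col = 1))).map
          (fun (r : Nat) => ufFind P P.length (r * (land.headI).length + col))) : PySem.Set Nat).foldl
        (fun s x => s + PySem.Dict.getD ((List.range land.length).foldl (fun d (r : Nat) =>
          (List.range (land.headI).length).foldl (fun (d : PySem.Dict Nat Int) (c' : Nat) =>
            if lgetI land r c' = 1 then
              d.insert (ufFind P P.length (r * (land.headI).length + c'))
                (d.getD (ufFind P P.length (r * (land.headI).length + c')) 0 + 1)
            else d) d) (PySem.Dict.empty : PySem.Dict Nat Int)) x 0) 0)) 0 := by
  refine (foldl_rel (fun _ => True) _ _ (List.range (land.headI).length) 0 trivial ?_).1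
  intro answer col hcol _
  refine ⟨?_, trivial⟩
  rw [col_eq land stF P hInv hAll hUF hE col (List.mem_range.mp hcol)]

-- ===== VERDICT (by name: the statement is the Claim_ definition above) =====
theorem solution_spec : Claim_equal_solution := by
  intro land _ _
  unfold Spec_solution
  exact cols_eq_gen land _ _ (phase1_final land).1 (phase1_final land).2
    (union_final land).1 (union_final land).2
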